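-- pv_equiv track=rewrite | github.com/myst-6/ukoly | public/assets/code/dreamingspires/sol.py | solve
-- ===== SOURCE A (Python) =====
-- from collections import deque
--
-- def solve(start, end):
--     start_state = start.split()
--     end_state = end.split()
--     if start_state == end_state:
--         return 0
--     start_state = [list(i) for i in start_state]
--     end_state = [list(i) for i in end_state]
--
--     for i in range(4):
--         if start_state[i] == ['0']:
--             start_state[i] = []
--         if end_state[i] == ['0']:
--             end_state[i] = []
--
--     q = deque([(0, tuple(tuple(i) for i in start_state))])
--     seen = set()
--     while q:
--         distance, state = q.popleft()
--         if state in seen: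
--             continue
--         seen.add(state)
--         for old in range(4):
--             if not state[old]:
--                 continue
--             new_state = [list(i) for i in state]
--             element = new_state[old].pop()
--             for new in range(4):
--                 if new == old:
--                     continue
--                 ns = new_state[:][:]
--                 ns[new].append(element)
--                 if ns == end_state:
--                     return distance + 1
--                 q.append((distance + 1, tuple(tuple(i) for i in ns)))
--                 ns[new].pop()
-- ===== SOURCE B (Python) =====
-- def solve(start, end):
--     # Bidirectional BFS: grow distance spheres alternately around both endpoints
--     # and stop when a newly generated state is already seen from the other side.
--     if start.split() == end.split():
--         return 0
--
--     def norm(tok):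
--         return () if tok == '0' else tuple(tok)
--
--     s = tuple(norm(t) for t in start.split())
--     t = tuple(norm(t) for t in end.split())
--
--     def expand(frontier, seen_own, seen_other):
--         # One sphere: children of the frontier; None signals the searches met.
--         fresh = []
--         for st in frontier:
--             for old in range(4):
--                 if not st[old]:
--                     continue
--                 e = st[old][-1]
--                 rest = st[old][:-1]
--                 for new in range(4):
--                     if new == old:
--                         continue
--                     child = tuple(rest if k == old else
--                                   st[k] + (e,) if k == new else st[k]
--                                   for k in range(4))
--                     if child in seen_other:
--                         return None
--                     if child not in seen_own:
--                         seen_own.add(child)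
--                         fresh.append(child)
--         return fresh
--
--     fS, fT = [s], [t]
--     seenS, seenT = {s}, {t}
--     moves = 0
--     while fS and fT:
--         if moves % 2 == 0:
--             res = expand(fS, seenS, seenT)
--             if res is None:
--                 return moves + 1
--             fS = res
--         else:
--             res = expand(fT, seenT, seenS)
--             if res is None:
--                 return moves + 1
--             fT = res
--         moves += 1
--     return None
-- ===== Notes on version B (the rewrite author's own statement) =====
-- stated objective: alternative
-- what changed: Replaces A's unidirectional queue BFS (goal tested on each generated child) by a bidirectional BFS that grows distance spheres alternately around the start and the end state and returns as soon as a newly generated state is already seen from the other side.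
-- outside the precondition, e.g. on solve('ab c d e f', 'a cb d e f'): A returns 1, B returns 2; on solve('a b 0 0', 'aa b 0 0'): A returns None, B returns None
import Mathlib
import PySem

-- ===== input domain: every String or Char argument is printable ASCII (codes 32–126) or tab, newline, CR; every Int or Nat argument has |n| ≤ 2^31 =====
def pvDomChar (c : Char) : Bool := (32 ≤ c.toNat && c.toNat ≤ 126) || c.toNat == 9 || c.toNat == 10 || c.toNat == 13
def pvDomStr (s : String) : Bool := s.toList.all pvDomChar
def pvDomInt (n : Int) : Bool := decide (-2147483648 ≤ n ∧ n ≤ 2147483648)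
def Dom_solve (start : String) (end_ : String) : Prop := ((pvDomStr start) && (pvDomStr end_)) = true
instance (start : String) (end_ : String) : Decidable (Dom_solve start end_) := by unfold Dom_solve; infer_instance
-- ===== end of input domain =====

-- B replaces A's unidirectional queue BFS (goal tested on each generated child) by a
-- bidirectional BFS growing distance spheres alternately from both endpoints, returning
-- when a newly generated state is already seen from the other side.

-- ===== PORT A =====
-- A's while-loop is ported with a fuel counter large enough for the BFS to finish
-- (proved below); result `none` = fuel out, `some none` = Python's `return None` (queue empty).

-- 'for i in range(4): if xs[i] == ['0']: xs[i] = []'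
def solveNormalize (s : List (List Char)) : List (List Char) :=
  [0, 1, 2, 3].foldl (fun acc i => acc.modify i (fun t => if t = ['0'] then [] else t)) s

-- inner 'for new in range(4)' of A: check goal / enqueue each generated state
def solveExpandNews (endS : List (List Char)) (d : Int) (popped : List (List Char))
    (old : Nat) (elem : Char) :
    List Nat → List (Int × List (List Char)) → Sum Int (List (Int × List (List Char)))
  | [], acc => Sum.inr acc
  | n :: ns, acc =>
    if n = old then solveExpandNews endS d popped old elem ns acc
    else
      let nsState := popped.modify n (fun t => t ++ [elem])
      if nsState = endS then Sum.inl (d + 1)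
      else solveExpandNews endS d popped old elem ns (acc ++ [(d + 1, nsState)])

-- outer 'for old in range(4)' of A
def solveExpandOlds (endS : List (List Char)) (d : Int) (s : List (List Char)) :
    List Nat → List (Int × List (List Char)) → Sum Int (List (Int × List (List Char)))
  | [], acc => Sum.inr acc
  | o :: os, acc =>
    if s.getD o [] = [] then solveExpandOlds endS d s os acc
    else
      match solveExpandNews endS d (s.modify o (fun t => t.dropLast)) o
          ((s.getD o []).getLast?.getD ' ') [0, 1, 2, 3] acc with
      | Sum.inl r => Sum.inl r
      | Sum.inr acc' => solveExpandOlds endS d s os acc'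

-- 'while q: distance, state = q.popleft(); ...'
def solveLoop (endS : List (List Char)) :
    Nat → List (Int × List (List Char)) → PySem.Set (List (List Char)) → Option (Option Int)
  | 0, _, _ => none
  | _ + 1, [], _ => some none
  | fuel + 1, (d, s) :: q, seen =>
    if s ∈ seen then solveLoop endS fuel q seen
    else
      match solveExpandOlds endS d s [0, 1, 2, 3] [] with
      | Sum.inl r => some (some r)
      | Sum.inr items => solveLoop endS fuel (q ++ items) (PySem.Set.add seen s)

def solve (start : String) (end_ : String) : Int :=
  let ss := PySem.Str.split₀ start
  let es := PySem.Str.split₀ end_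
  if ss = es then 0
  else
    let startState := solveNormalize (ss.map String.toList)
    let endState := solveNormalize (es.map String.toList)
    let n := startState.flatten.length
    match solveLoop endState (13 * (Nat.factorial n * (n + 1) ^ 3) + 13) [(0, startState)] PySem.Set.empty with
    | some (some d) => d
    | _ => 0   -- Python returns None here (unreachable target): outside Pre_solve

-- ===== PORT B =====
def solveAltNorm (t : List Char) : List Char := if t = ['0'] then [] else t

-- the 4-tuple comprehension building a child state in B
def solveAltChild (s : List (List Char)) (old new : Nat) (rest : List Char) (elem : Char) :
    List (List Char) :=
  [0, 1, 2, 3].map fun i =>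
    if i = old then rest else if i = new then s.getD i [] ++ [elem] else s.getD i []

-- inner 'for new in range(4)' of B's expand: `none` = a child was seen from the other side
def bNews (seenOther : PySem.Set (List (List Char))) (st : List (List Char)) (old : Nat)
    (rest : List Char) (elem : Char) :
    List Nat → PySem.Set (List (List Char)) × List (List (List Char)) →
      Option (PySem.Set (List (List Char)) × List (List (List Char)))
  | [], p => some p
  | n :: ns, p =>
    if n = old then bNews seenOther st old rest elem ns p
    else
      let child := solveAltChild st old n rest elem
      if child ∈ seenOther then none
      else if child ∈ p.1 then bNews seenOther st old rest elem ns p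
      else bNews seenOther st old rest elem ns (PySem.Set.add p.1 child, p.2 ++ [child])

-- 'for old in range(4)' of B's expand
def bOlds (seenOther : PySem.Set (List (List Char))) (st : List (List Char)) :
    List Nat → PySem.Set (List (List Char)) × List (List (List Char)) →
      Option (PySem.Set (List (List Char)) × List (List (List Char)))
  | [], p => some p
  | o :: os, p =>
    if st.getD o [] = [] then bOlds seenOther st os p
    else
      match bNews seenOther st o ((st.getD o []).dropLast)
          ((st.getD o []).getLast?.getD ' ') [0, 1, 2, 3] p with
      | none => none
      | some p' => bOlds seenOther st os p'

-- 'for st in frontier' of B's expand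
def bExpand (seenOther : PySem.Set (List (List Char))) :
    List (List (List Char)) → PySem.Set (List (List Char)) × List (List (List Char)) →
      Option (PySem.Set (List (List Char)) × List (List (List Char)))
  | [], p => some p
  | st :: rest, p =>
    match bOlds seenOther st [0, 1, 2, 3] p with
    | none => none
    | some p' => bExpand seenOther rest p'

-- 'while fS and fT: ...' (fuel counts iterations; proved sufficient below);
-- result `none` = fuel out, `some none` = Python's `return None`
def bLoop : Nat → List (List (List Char)) → List (List (List Char)) →
    PySem.Set (List (List Char)) → PySem.Set (List (List Char)) → Nat → Option (Option Int)
  | 0, _, _, _, _, _ => none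
  | fuel + 1, fS, fT, seenS, seenT, m =>
    if fS = [] ∨ fT = [] then some none
    else if m % 2 = 0 then
      match bExpand seenT fS (seenS, []) with
      | none => some (some ((m : Int) + 1))
      | some (seenS', fresh) => bLoop fuel fresh fT seenS' seenT (m + 1)
    else
      match bExpand seenS fT (seenT, []) with
      | none => some (some ((m : Int) + 1))
      | some (seenT', fresh) => bLoop fuel fS fresh seenS seenT' (m + 1)

def solve_alt (start : String) (end_ : String) : Int :=
  let ss := PySem.Str.split₀ start
  let es := PySem.Str.split₀ end_
  if ss = es then 0
  else
    let source := ss.map (fun t => solveAltNorm t.toList)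
    let target := es.map (fun t => solveAltNorm t.toList)
    let n := source.flatten.length
    match bLoop (2 * (Nat.factorial n * (n + 1) ^ 3) + 4) [source] [target]
        (PySem.Set.ofList [source]) (PySem.Set.ofList [target]) 0 with
    | some r =>
      match r with
      | some d => d
      | none => 0   -- Python returns None here: outside Pre_solve
    | none => 0

-- ===== PRECONDITION & SPEC =====
-- Pre_solve excludes inputs whose split token lists differ and are not two
-- lists of exactly 4 tokens carrying the same multiset of characters (after the
-- '0'-token → empty-stack normalization): with fewer than 4 tokens A raises
-- IndexError, with unequal multisets A's BFS exhausts and returns None (not an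
-- int), and with more than 4 tokens A runs a degenerate game frozen outside the
-- first four stacks — outside the four-stack problem this function implements.
def Pre_solve (start : String) (end_ : String) : Prop :=
  PySem.Str.split₀ start = PySem.Str.split₀ end_ ∨
    ((PySem.Str.split₀ start).length = 4 ∧ (PySem.Str.split₀ end_).length = 4 ∧
      List.Perm
        (((PySem.Str.split₀ start).map
          (fun t => if t.toList = ['0'] then [] else t.toList)).flatten)
        (((PySem.Str.split₀ end_).map
          (fun t => if t.toList = ['0'] then [] else t.toList)).flatten))
instance (start : String) (end_ : String) : Decidable (Pre_solve start end_) := by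
  unfold Pre_solve; infer_instance

def pvWitness_solve : String × String := ("ab 0 0 0", "0 ab 0 0")

def Spec_solve (start : String) (end_ : String) (out : Int) : Prop := out = solve_alt start end_
instance (start : String) (end_ : String) (out : Int) : Decidable (Spec_solve start end_ out) := by
  unfold Spec_solve; infer_instance

-- ===== CLAIM (what is proved, stated in full; the proofs are below) =====
def Claim_equal_solve : Prop := ∀ (start : String) (end_ : String), Dom_solve start end_ → Pre_solve start end_ → Spec_solve start end_ (solve start end_)

-- ===== LEMMAS AND PROOFS =====

-- `List.modify` on an explicit 4-element list
theorem modify4_zero (a b c d : List Char) (f : List Char → List Char) :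
    List.modify [a, b, c, d] 0 f = [f a, b, c, d] := rfl
theorem modify4_one (a b c d : List Char) (f : List Char → List Char) :
    List.modify [a, b, c, d] 1 f = [a, f b, c, d] := rfl
theorem modify4_two (a b c d : List Char) (f : List Char → List Char) :
    List.modify [a, b, c, d] 2 f = [a, b, f c, d] := rfl
theorem modify4_three (a b c d : List Char) (f : List Char → List Char) :
    List.modify [a, b, c, d] 3 f = [a, b, c, f d] := rfl

-- the child states of one state, in generation order (A's representation)
def kidsOf (s : List (List Char)) (o : Nat) : List (List (List Char)) :=
  if s.getD o [] = [] then []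
  else
    [0, 1, 2, 3].filterMap fun n =>
      if n = o then none
      else some ((s.modify o (fun t => t.dropLast)).modify n
        (fun t => t ++ [(s.getD o []).getLast?.getD ' ']))

def kids (s : List (List Char)) : List (List (List Char)) := [0, 1, 2, 3].flatMap (kidsOf s)

-- the child states in B's representation
def kidsBOf (s : List (List Char)) (o : Nat) : List (List (List Char)) :=
  if s.getD o [] = [] then []
  else
    [0, 1, 2, 3].filterMap fun n =>
      if n = o then none
      else some (solveAltChild s o n ((s.getD o []).dropLast) ((s.getD o []).getLast?.getD ' '))

def kidsB (s : List (List Char)) : List (List (List Char)) := [0, 1, 2, 3].flatMap (kidsBOf s)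

-- first-occurrence filter of not-yet-seen states, and the updated seen set
def dFilter (seen : PySem.Set (List (List Char))) :
    List (List (List Char)) → List (List (List Char))
  | [] => []
  | c :: cs => if c ∈ seen then dFilter seen cs else c :: dFilter (PySem.Set.add seen c) cs

def seenUpd (seen : PySem.Set (List (List Char))) :
    List (List (List Char)) → PySem.Set (List (List Char))
  | [] => seen
  | c :: cs => if c ∈ seen then seenUpd seen cs else seenUpd (PySem.Set.add seen c) cs

-- one BFS level of A, abstracted
def levelA (endS : List (List Char)) (seen : PySem.Set (List (List Char))) :
    List (List (List Char)) → Sum Unit (List (List (List Char)) × PySem.Set (List (List Char)))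
  | [] => Sum.inr ([], seen)
  | s :: E =>
    if s ∈ seen then levelA endS seen E
    else if endS ∈ kids s then Sum.inl ()
    else
      match levelA endS (PySem.Set.add seen s) E with
      | Sum.inl u => Sum.inl u
      | Sum.inr (cs, sn) => Sum.inr (kids s ++ cs, sn)

-- clean level-synchronous reference BFS (proof-side), used as a bridge between the two ports
def levNews (target : List (List Char)) (s : List (List Char)) (old : Nat)
    (rest : List Char) (elem : Char) :
    List Nat → PySem.Set (List (List Char)) × List (List (List Char)) →
      Sum Unit (PySem.Set (List (List Char)) × List (List (List Char)))
  | [], p => Sum.inr p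
  | n :: ns, p =>
    if n = old then levNews target s old rest elem ns p
    else
      let child := solveAltChild s old n rest elem
      if child = target then Sum.inl ()
      else if child ∈ p.1 then levNews target s old rest elem ns p
      else levNews target s old rest elem ns (PySem.Set.add p.1 child, p.2 ++ [child])

def levOlds (target : List (List Char)) (s : List (List Char)) :
    List Nat → PySem.Set (List (List Char)) × List (List (List Char)) →
      Sum Unit (PySem.Set (List (List Char)) × List (List (List Char)))
  | [], p => Sum.inr p
  | o :: os, p =>
    if s.getD o [] = [] then levOlds target s os p
    else
      match levNews target s o ((s.getD o []).dropLast) ((s.getD o []).getLast?.getD ' ')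
          [0, 1, 2, 3] p with
      | Sum.inl u => Sum.inl u
      | Sum.inr p' => levOlds target s os p'

def levLevel (target : List (List Char)) :
    List (List (List Char)) → PySem.Set (List (List Char)) × List (List (List Char)) →
      Sum Unit (PySem.Set (List (List Char)) × List (List (List Char)))
  | [], p => Sum.inr p
  | st :: rest, p =>
    match levOlds target st [0, 1, 2, 3] p with
    | Sum.inl u => Sum.inl u
    | Sum.inr p' => levLevel target rest p'

def levLoop (target : List (List Char)) :
    Nat → List (List (List Char)) → PySem.Set (List (List Char)) → Int → Option (Option Int)
  | 0, _, _, _ => none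
  | _ + 1, [], _, _ => some none
  | fuel + 1, st :: frontier, seen, dist =>
    match levLevel target (st :: frontier) (seen, []) with
    | Sum.inl _ => some (some (dist + 1))
    | Sum.inr (seen', nxt) => levLoop target fuel nxt seen' (dist + 1)

theorem expandNews_eq (endS : List (List Char)) (d : Int) (popped : List (List Char))
    (o : Nat) (elem : Char) (ns : List Nat) (acc : List (Int × List (List Char))) :
    solveExpandNews endS d popped o elem ns acc =
      (if endS ∈ ns.filterMap (fun n => if n = o then none
            else some (popped.modify n (fun t => t ++ [elem])))
       then Sum.inl (d + 1)
       else Sum.inr (acc ++ (ns.filterMap (fun n => if n = o then none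
            else some (popped.modify n (fun t => t ++ [elem])))).map (fun c => (d + 1, c)))) := by
  induction ns generalizing acc with
  | nil => simp [solveExpandNews]
  | cons n ns ih =>
    by_cases h : n = o
    · simp [solveExpandNews, h, ih]
    · by_cases hg : popped.modify n (fun t => t ++ [elem]) = endS
      · simp [solveExpandNews, h, hg, List.filterMap_cons]
      · have hg' : ¬ endS = popped.modify n (fun t => t ++ [elem]) := fun he => hg he.symm
        simp only [solveExpandNews, h, if_false, hg, List.filterMap_cons, ite_false, if_neg]
        rw [ih]
        simp [List.mem_cons, hg', List.append_assoc]

theorem expandOlds_eq (endS : List (List Char)) (d : Int) (s : List (List Char))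
    (os : List Nat) (acc : List (Int × List (List Char))) :
    solveExpandOlds endS d s os acc =
      (if endS ∈ os.flatMap (kidsOf s)
       then Sum.inl (d + 1)
       else Sum.inr (acc ++ (os.flatMap (kidsOf s)).map (fun c => (d + 1, c)))) := by
  induction os generalizing acc with
  | nil => simp [solveExpandOlds]
  | cons o os ih =>
    rw [List.flatMap_cons]
    by_cases he : s.getD o [] = []
    · have hk0 : kidsOf s o = [] := by rw [kidsOf, if_pos he]
      rw [hk0, List.nil_append]
      simp only [solveExpandOlds]
      rw [if_pos he, ih]
    · have hk : kidsOf s o = List.filterMap (fun n =>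
          if n = o then none
          else some ((s.modify o fun t => t.dropLast).modify n
            fun t => t ++ [(s.getD o []).getLast?.getD ' '])) [0, 1, 2, 3] := by
        rw [kidsOf, if_neg he]
      simp only [solveExpandOlds]
      rw [if_neg he, expandNews_eq, ← hk]
      by_cases hm : endS ∈ kidsOf s o
      · rw [if_pos hm, if_pos (List.mem_append.mpr (Or.inl hm))]
      · rw [if_neg hm]
        show solveExpandOlds endS d s os (acc ++ (kidsOf s o).map (fun c => (d + 1, c))) = _
        rw [ih]
        by_cases hm2 : endS ∈ List.flatMap (kidsOf s) os
        · rw [if_pos hm2, if_pos (List.mem_append.mpr (Or.inr hm2))]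
        · rw [if_neg hm2, if_neg (fun hmm => (List.mem_append.mp hmm).elim hm hm2),
              List.map_append, List.append_assoc]

theorem loopA_level (endS : List (List Char)) (d : Int) (E : List (List (List Char)))
    (rest : List (Int × List (List Char))) (seen : PySem.Set (List (List Char))) (f : Nat) :
    solveLoop endS (f + E.length) (E.map (fun s => (d, s)) ++ rest) seen =
      (match levelA endS seen E with
       | Sum.inl _ => some (some (d + 1))
       | Sum.inr (cs, sn) => solveLoop endS f (rest ++ cs.map (fun c => (d + 1, c))) sn) := by
  induction E generalizing rest seen f with
  | nil => simp [levelA, solveLoop]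
  | cons s E ih =>
    have hfuel : f + (s :: E).length = (f + E.length) + 1 := by simp; omega
    rw [hfuel]
    by_cases hs : s ∈ seen
    · simp only [List.map_cons, List.cons_append, solveLoop]
      rw [if_pos hs, ih]
      simp only [levelA]
      rw [if_pos hs]
    · simp only [List.map_cons, List.cons_append, solveLoop]
      rw [if_neg hs, expandOlds_eq]
      have hfold : List.flatMap (kidsOf s) [0, 1, 2, 3] = kids s := rfl
      rw [hfold]
      simp only [levelA]
      rw [if_neg hs]
      by_cases hk : endS ∈ kids s
      · rw [if_pos hk, if_pos hk]
      · rw [if_neg hk, if_neg hk, List.nil_append]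
        show solveLoop endS (f + E.length)
            ((E.map (fun s => (d, s)) ++ rest) ++ (kids s).map (fun c => (d + 1, c)))
            (PySem.Set.add seen s) = _
        rw [List.append_assoc, ih]
        rcases hla : levelA endS (PySem.Set.add seen s) E with u | ⟨cs, sn⟩ <;>
          simp [List.map_append, List.append_assoc]

theorem mem_seenUpd (seen : PySem.Set (List (List Char))) (l : List (List (List Char)))
    (x : List (List Char)) : x ∈ seenUpd seen l ↔ x ∈ seen ∨ x ∈ dFilter seen l := by
  induction l generalizing seen with
  | nil => simp [seenUpd, dFilter]
  | cons c cs ih =>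
    by_cases h : c ∈ seen
    · simp [seenUpd, dFilter, h, ih]
    · simp [seenUpd, dFilter, h, ih, PySem.Set.mem_add]
      tauto

theorem dFilter_congr (s1 s2 : PySem.Set (List (List Char))) (l : List (List (List Char)))
    (h : ∀ x, x ∈ s1 ↔ x ∈ s2) : dFilter s1 l = dFilter s2 l := by
  induction l generalizing s1 s2 with
  | nil => simp [dFilter]
  | cons c cs ih =>
    by_cases hc : c ∈ s1
    · simp [dFilter, hc, (h c).1 hc, ih _ _ h]
    · have hc2 : c ∉ s2 := fun h2 => hc ((h c).2 h2)
      simp only [dFilter, hc, hc2, if_neg, ite_false]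
      rw [ih (PySem.Set.add s1 c) (PySem.Set.add s2 c)
        (fun x => by simp [PySem.Set.mem_add, h x])]

theorem dFilter_subset (seen : PySem.Set (List (List Char))) (l : List (List (List Char)))
    (x : List (List Char)) (h : x ∈ dFilter seen l) : x ∈ l := by
  induction l generalizing seen with
  | nil => simp [dFilter] at h
  | cons c cs ih =>
    by_cases hc : c ∈ seen
    · simp only [dFilter, hc, if_pos, ite_true] at h
      exact List.mem_cons_of_mem _ (ih _ h)
    · simp only [dFilter, hc, if_neg, ite_false, List.mem_cons] at h
      rcases h with h | h
      · simp [h]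
      · exact List.mem_cons_of_mem _ (ih _ h)

theorem mem_dFilter (seen : PySem.Set (List (List Char))) (l : List (List (List Char)))
    (x : List (List Char)) : x ∈ dFilter seen l ↔ x ∈ l ∧ x ∉ seen := by
  induction l generalizing seen with
  | nil => simp [dFilter]
  | cons c cs ih =>
    by_cases hc : c ∈ seen
    · simp only [dFilter, hc, if_pos, ite_true, ih, List.mem_cons]
      constructor
      · rintro ⟨h1, h2⟩; exact ⟨Or.inr h1, h2⟩
      · rintro ⟨h1 | h1, h2⟩
        · exact absurd (h1 ▸ hc) h2
        · exact ⟨h1, h2⟩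
    · simp only [dFilter, hc, if_neg, ite_false, List.mem_cons, ih, PySem.Set.mem_add]
      by_cases hxc : x = c
      · simp [hxc, hc]
      · simp only [hxc, false_or]
        tauto

theorem seenUpd_length (seen : PySem.Set (List (List Char))) (l : List (List (List Char))) :
    (seenUpd seen l).length = seen.length + (dFilter seen l).length := by
  induction l generalizing seen with
  | nil => simp [seenUpd, dFilter]
  | cons c cs ih =>
    by_cases hc : c ∈ seen
    · simp [seenUpd, dFilter, hc, ih]
    · simp only [seenUpd, dFilter, hc, if_neg, ite_false]
      rw [ih, PySem.Set.add_of_not_mem hc]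
      simp
      omega

theorem seenUpd_nodup (seen : PySem.Set (List (List Char))) (l : List (List (List Char)))
    (h : seen.Nodup) : (seenUpd seen l).Nodup := by
  induction l generalizing seen with
  | nil => exact h
  | cons c cs ih =>
    simp only [seenUpd]
    by_cases hc : c ∈ seen
    · rw [if_pos hc]; exact ih _ h
    · rw [if_neg hc]; exact ih _ (PySem.Set.nodup_add _ _ h)

theorem dFilter_append (seen : PySem.Set (List (List Char))) (l1 l2 : List (List (List Char))) :
    dFilter seen (l1 ++ l2) = dFilter seen l1 ++ dFilter (seenUpd seen l1) l2 := by
  induction l1 generalizing seen with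
  | nil => simp [dFilter, seenUpd]
  | cons c cs ih =>
    by_cases hc : c ∈ seen
    · simp [dFilter, seenUpd, hc, ih]
    · simp [dFilter, seenUpd, hc, ih]

theorem seenUpd_append (seen : PySem.Set (List (List Char))) (l1 l2 : List (List (List Char))) :
    seenUpd seen (l1 ++ l2) = seenUpd (seenUpd seen l1) l2 := by
  induction l1 generalizing seen with
  | nil => simp [seenUpd]
  | cons c cs ih =>
    by_cases hc : c ∈ seen
    · simp [seenUpd, hc, ih]
    · simp [seenUpd, hc, ih]

theorem levelA_spec (endS : List (List Char)) (seen : PySem.Set (List (List Char)))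
    (E : List (List (List Char))) :
    levelA endS seen E =
      (if ∃ s ∈ dFilter seen E, endS ∈ kids s then Sum.inl ()
       else Sum.inr ((dFilter seen E).flatMap kids, seenUpd seen E)) := by
  induction E generalizing seen with
  | nil =>
    simp only [levelA, dFilter, seenUpd]
    rw [if_neg (by simp)]
    simp
  | cons s E ih =>
    simp only [levelA, dFilter, seenUpd]
    by_cases hs : s ∈ seen
    · rw [if_pos hs, if_pos hs, if_pos hs, ih]
    · rw [if_neg hs, if_neg hs, if_neg hs]
      by_cases hk : endS ∈ kids s
      · rw [if_pos hk, if_pos ⟨s, List.mem_cons_self, hk⟩]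
      · rw [if_neg hk, ih]
        by_cases hex : ∃ t ∈ dFilter (PySem.Set.add seen s) E, endS ∈ kids t
        · rw [if_pos hex]
          have hex' : ∃ t ∈ s :: dFilter (PySem.Set.add seen s) E, endS ∈ kids t := by
            obtain ⟨t, ht, htk⟩ := hex
            exact ⟨t, List.mem_cons_of_mem _ ht, htk⟩
          rw [if_pos hex']
        · rw [if_neg hex]
          have hex' : ¬ ∃ t ∈ s :: dFilter (PySem.Set.add seen s) E, endS ∈ kids t := by
            rintro ⟨t, ht, htk⟩
            rcases List.mem_cons.mp ht with rfl | ht'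
            · exact hk htk
            · exact hex ⟨t, ht', htk⟩
          rw [if_neg hex', List.flatMap_cons]

theorem levNews_eq (target : List (List Char)) (s : List (List Char)) (o : Nat)
    (rest : List Char) (elem : Char) (ns : List Nat)
    (p : PySem.Set (List (List Char)) × List (List (List Char))) :
    levNews target s o rest elem ns p =
      (if target ∈ ns.filterMap (fun n => if n = o then none
            else some (solveAltChild s o n rest elem))
       then Sum.inl ()
       else Sum.inr (seenUpd p.1 (ns.filterMap (fun n => if n = o then none
            else some (solveAltChild s o n rest elem))),
          p.2 ++ dFilter p.1 (ns.filterMap (fun n => if n = o then none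
            else some (solveAltChild s o n rest elem))))) := by
  induction ns generalizing p with
  | nil => simp [levNews, seenUpd, dFilter]
  | cons n ns ih =>
    obtain ⟨pse, pnx⟩ := p
    by_cases h : n = o
    · simp [levNews, h, ih]
    · by_cases hg : solveAltChild s o n rest elem = target
      · simp [levNews, h, hg, List.filterMap_cons]
      · have hg' : ¬ target = solveAltChild s o n rest elem := fun he => hg he.symm
        by_cases hseen : solveAltChild s o n rest elem ∈ pse
        · simp only [levNews, h, hg, if_neg, ite_false, hseen, if_pos, ite_true,
            List.filterMap_cons]
          rw [ih]
          simp [seenUpd, dFilter, hseen, hg', List.mem_cons]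
        · simp only [levNews, h, hg, if_neg, ite_false, hseen, List.filterMap_cons]
          rw [ih]
          simp [seenUpd, dFilter, hseen, hg', List.mem_cons, List.append_assoc]

theorem levOlds_eq (target : List (List Char)) (s : List (List Char)) (os : List Nat)
    (p : PySem.Set (List (List Char)) × List (List (List Char))) :
    levOlds target s os p =
      (if target ∈ os.flatMap (kidsBOf s) then Sum.inl ()
       else Sum.inr (seenUpd p.1 (os.flatMap (kidsBOf s)),
          p.2 ++ dFilter p.1 (os.flatMap (kidsBOf s)))) := by
  induction os generalizing p with
  | nil => simp [levOlds, seenUpd, dFilter]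
  | cons o os ih =>
    obtain ⟨pse, pnx⟩ := p
    rw [List.flatMap_cons]
    by_cases he : s.getD o [] = []
    · have hk0 : kidsBOf s o = [] := by rw [kidsBOf, if_pos he]
      rw [hk0, List.nil_append]
      simp only [levOlds]
      rw [if_pos he, ih]
    · have hk : kidsBOf s o = List.filterMap (fun n => if n = o then none
          else some (solveAltChild s o n ((s.getD o []).dropLast)
            ((s.getD o []).getLast?.getD ' '))) [0, 1, 2, 3] := by
        rw [kidsBOf, if_neg he]
      simp only [levOlds]
      rw [if_neg he, levNews_eq, ← hk]
      by_cases hm : target ∈ kidsBOf s o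
      · rw [if_pos hm, if_pos (List.mem_append.mpr (Or.inl hm))]
      · rw [if_neg hm]
        show levOlds target s os
            (seenUpd pse (kidsBOf s o), pnx ++ dFilter pse (kidsBOf s o)) = _
        rw [ih]
        by_cases hm2 : target ∈ List.flatMap (kidsBOf s) os
        · rw [if_pos hm2, if_pos (List.mem_append.mpr (Or.inr hm2))]
        · rw [if_neg hm2, if_neg (fun hmm => (List.mem_append.mp hmm).elim hm hm2)]
          simp [dFilter_append, seenUpd_append, List.append_assoc]

theorem levLevel_eq (target : List (List Char)) (F : List (List (List Char)))
    (p : PySem.Set (List (List Char)) × List (List (List Char))) :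
    levLevel target F p =
      (if ∃ s ∈ F, target ∈ kidsB s then Sum.inl ()
       else Sum.inr (seenUpd p.1 (F.flatMap kidsB), p.2 ++ dFilter p.1 (F.flatMap kidsB))) := by
  induction F generalizing p with
  | nil => simp [levLevel, seenUpd, dFilter]
  | cons s F ih =>
    obtain ⟨pse, pnx⟩ := p
    simp only [levLevel]
    rw [levOlds_eq]
    have hkb : [0,1,2,3].flatMap (kidsBOf s) = kidsB s := rfl
    rw [hkb]
    by_cases hm : target ∈ kidsB s
    · simp [hm]
    · simp only [hm, if_neg, ite_false]
      rw [ih]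
      by_cases hex : ∃ t ∈ F, target ∈ kidsB t
      · simp [hex, hm]
      · simp [hex, hm, List.flatMap_cons, dFilter_append, seenUpd_append, List.append_assoc]

theorem exists_four (s : List (List Char)) (h : s.length = 4) :
    ∃ a b c d, s = [a, b, c, d] := by
  rcases s with _ | ⟨a, s⟩
  · simp at h
  rcases s with _ | ⟨b, s⟩
  · simp at h
  rcases s with _ | ⟨c, s⟩
  · simp at h
  rcases s with _ | ⟨d, s⟩
  · simp at h
  rcases s with _ | ⟨e, s⟩
  · exact ⟨a, b, c, d, rfl⟩
  · simp at h

theorem flatten4_perm (w x y z w' x' y' z' : List Char)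
    (h : ∀ e : Char, w'.count e + x'.count e + y'.count e + z'.count e
        = w.count e + x.count e + y.count e + z.count e) :
    ([w', x', y', z'] : List (List Char)).flatten.Perm
      (([w, x, y, z] : List (List Char)).flatten) := by
  rw [List.perm_iff_count]
  intro e
  have := h e
  simp only [List.flatten_cons, List.flatten_nil, List.count_append, List.count_nil,
    List.append_nil]
  omega

theorem dropLast_last (l : List Char) (hl : l ≠ []) :
    l.dropLast ++ [l.getLast?.getD ' '] = l := by
  rw [List.getLast?_eq_getLast hl]
  exact List.dropLast_append_getLast hl

theorem count_dropLast_add (l : List Char) (hl : l ≠ []) (e : Char) :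
    l.dropLast.count e + ([l.getLast?.getD ' '] : List Char).count e = l.count e := by
  have h := congrArg (fun t : List Char => t.count e) (dropLast_last l hl)
  simpa [List.count_append] using h

theorem getD4_zero (a b c d : List Char) : ([a, b, c, d] : List (List Char)).getD 0 [] = a := rfl
theorem getD4_one (a b c d : List Char) : ([a, b, c, d] : List (List Char)).getD 1 [] = b := rfl
theorem getD4_two (a b c d : List Char) : ([a, b, c, d] : List (List Char)).getD 2 [] = c := rfl
theorem getD4_three (a b c d : List Char) : ([a, b, c, d] : List (List Char)).getD 3 [] = d := rfl

theorem mem_kidsOf (s : List (List Char)) (o : Nat) (c : List (List Char))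
    (hc : c ∈ kidsOf s o) :
    s.getD o [] ≠ [] ∧ ∃ m ∈ ([0, 1, 2, 3] : List Nat), m ≠ o ∧
      c = (s.modify o fun t => t.dropLast).modify m
        (fun t => t ++ [(s.getD o []).getLast?.getD ' ']) := by
  rw [kidsOf] at hc
  split at hc
  · exact absurd hc (by simp)
  · rename_i hne
    refine ⟨hne, ?_⟩
    obtain ⟨m, hm, hmc⟩ := List.mem_filterMap.mp hc
    refine ⟨m, hm, ?_⟩
    by_cases hmo : m = o
    · rw [if_pos hmo] at hmc
      exact absurd hmc (by simp)
    · rw [if_neg hmo] at hmc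
      exact ⟨hmo, (Option.some.inj hmc).symm⟩

theorem mem_kids_intro (s : List (List Char)) (h4 : s.length = 4) (o m : Nat)
    (hm : m ∈ ([0, 1, 2, 3] : List Nat)) (ho : o ∈ ([0, 1, 2, 3] : List Nat)) (hmo : m ≠ o)
    (hne : s.getD o [] ≠ []) :
    (s.modify o fun t => t.dropLast).modify m
      (fun t => t ++ [(s.getD o []).getLast?.getD ' ']) ∈ kids s := by
  refine List.mem_flatMap.mpr ⟨o, ho, ?_⟩
  rw [kidsOf, if_neg hne]
  exact List.mem_filterMap.mpr ⟨m, hm, by rw [if_neg hmo]⟩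

theorem kidsB_eq_kids (s : List (List Char)) (h : s.length = 4) : kidsB s = kids s := by
  obtain ⟨a, b, c, d, rfl⟩ := exists_four s h
  rfl

theorem kids_valid (s : List (List Char)) (h : s.length = 4) (c : List (List Char))
    (hc : c ∈ kids s) : c.length = 4 ∧ c.flatten.Perm s.flatten := by
  obtain ⟨a, b, cc, dd, rfl⟩ := exists_four s h
  simp only [kids, List.mem_flatMap] at hc
  obtain ⟨o, ho, hco⟩ := hc
  obtain ⟨hne, m, hm, hmo, rfl⟩ := mem_kidsOf _ o _ hco
  fin_cases ho <;> fin_cases hm <;>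
    first
    | exact absurd rfl hmo
    | (simp only [getD4_zero, getD4_one, getD4_two, getD4_three] at hne ⊢
       simp only [modify4_zero, modify4_one, modify4_two, modify4_three]
       refine ⟨by simp, flatten4_perm _ _ _ _ _ _ _ _ (fun e => ?_)⟩
       simp only [List.count_append]
       first
       | (have hcc := count_dropLast_add a hne e; omega)
       | (have hcc := count_dropLast_add b hne e; omega)
       | (have hcc := count_dropLast_add cc hne e; omega)
       | (have hcc := count_dropLast_add dd hne e; omega))

theorem lt4_of_mem {o : Nat} (h : o ∈ ([0, 1, 2, 3] : List Nat)) : o < 4 := by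
  fin_cases h <;> norm_num

theorem getD_modify_self (l : List (List Char)) (i : Nat) (f : List Char → List Char)
    (hi : i < l.length) : (l.modify i f).getD i [] = f (l.getD i []) := by
  rw [List.getD_eq_getElem _ [] (by simpa using hi), List.getD_eq_getElem _ [] hi]
  exact List.getElem_modify_eq f i l _

theorem getD_modify_ne (l : List (List Char)) (i j : Nat) (f : List Char → List Char)
    (hij : i ≠ j) : (l.modify i f).getD j [] = l.getD j [] := by
  by_cases hj : j < l.length
  · rw [List.getD_eq_getElem _ [] (by simpa using hj), List.getD_eq_getElem _ [] hj]
    exact List.getElem_modify_ne f l hij _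
  · rw [List.getD_eq_default _ [] (by simpa using hj), List.getD_eq_default _ [] (by omega)]

theorem eq_of_getD (l1 l2 : List (List Char)) (hlen : l1.length = l2.length)
    (h : ∀ j, l1.getD j [] = l2.getD j []) : l1 = l2 := by
  apply List.ext_getElem hlen
  intro i h1 h2
  have hgd := h i
  rwa [List.getD_eq_getElem _ [] h1, List.getD_eq_getElem _ [] h2] at hgd

theorem kids_symm (s t : List (List Char)) (h4 : s.length = 4) (ht : t ∈ kids s) :
    s ∈ kids t := by
  simp only [kids, List.mem_flatMap] at ht
  obtain ⟨o, ho4, hco⟩ := ht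
  obtain ⟨hne, m, hm4, hmo, rfl⟩ := mem_kidsOf s o _ hco
  have ho : o < 4 := lt4_of_mem ho4
  have hm : m < 4 := lt4_of_mem hm4
  have hos : o < s.length := by omega
  have hms : m < s.length := by omega
  set e := (s.getD o []).getLast?.getD ' ' with he
  set t := (s.modify o (fun u => u.dropLast)).modify m (fun u => u ++ [e]) with htdef
  have hlt : t.length = s.length := by
    rw [htdef, List.length_modify, List.length_modify]
  have htm : t.getD m [] = s.getD m [] ++ [e] := by
    rw [htdef, getD_modify_self _ _ _ (by rw [List.length_modify]; exact hms),
      getD_modify_ne _ _ _ _ (fun hh => hmo hh.symm)]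
  have hto : t.getD o [] = (s.getD o []).dropLast := by
    rw [htdef, getD_modify_ne _ _ _ _ hmo, getD_modify_self _ _ _ hos]
  have hne' : t.getD m [] ≠ [] := by
    rw [htm]; simp
  have hkey := mem_kids_intro t (hlt.trans h4) m o ho4 hm4 (fun hh => hmo hh.symm) hne'
  have hee : (t.getD m []).getLast?.getD ' ' = e := by
    rw [htm, List.getLast?_concat]; rfl
  have hgoal : (t.modify m fun u => u.dropLast).modify o
      (fun u => u ++ [(t.getD m []).getLast?.getD ' ']) = s := by
    rw [hee]
    apply eq_of_getD
    · rw [List.length_modify, List.length_modify, hlt]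
    · intro j
      by_cases hjo : j = o
      · subst hjo
        rw [getD_modify_self _ _ _ (by rw [List.length_modify]; omega),
          getD_modify_ne _ _ _ _ hmo, hto, he]
        exact dropLast_last _ hne
      · by_cases hjm : j = m
        · subst hjm
          rw [getD_modify_ne _ _ _ _ (fun hh => hjo hh.symm),
            getD_modify_self _ _ _ (by omega), htm, List.dropLast_concat]
        · rw [getD_modify_ne _ _ _ _ (fun hh => hjo hh.symm),
            getD_modify_ne _ _ _ _ (fun hh => hjm hh.symm), htdef,
            getD_modify_ne _ _ _ _ (fun hh => hjm hh.symm),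
            getD_modify_ne _ _ _ _ (fun hh => hjo hh.symm)]
  rw [hgoal] at hkey
  exact hkey

theorem kids_length_le (s : List (List Char)) : (kids s).length ≤ 12 := by
  have hof : ∀ o ∈ ([0, 1, 2, 3] : List Nat), (kidsOf s o).length ≤ 3 := by
    intro o ho
    fin_cases ho <;> (rw [kidsOf]; split <;> simp)
  simp only [kids]
  rw [List.flatMap_cons, List.flatMap_cons, List.flatMap_cons, List.flatMap_cons,
    List.flatMap_nil]
  simp only [List.length_append, List.length_nil]
  have h0 := hof 0 (by simp)
  have h1 := hof 1 (by simp)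
  have h2 := hof 2 (by simp)
  have h3 := hof 3 (by simp)
  omega
theorem sim (endS : List (List Char)) (fB : Nat) :
    ∀ (E F : List (List (List Char))) (seenA seenB : PySem.Set (List (List Char)))
      (d : Int) (r : Option Int),
      F = dFilter seenA E →
      (∀ x, x ∈ seenB ↔ x ∈ seenA ∨ x ∈ F) →
      (∀ s ∈ E, s.length = 4) →
      levLoop endS fB F seenB d = some r →
      ∃ fA, solveLoop endS fA (E.map (fun s => (d, s))) seenA = some r := by
  induction fB with
  | zero =>
    intro E F sA sB d r hF hB h4 h
    simp [levLoop] at h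
  | succ fB ih =>
    intro E F sA sB d r hF hB h4 h
    rcases F with _ | ⟨s0, F'⟩
    · simp only [levLoop] at h
      obtain rfl : (none : Option Int) = r := Option.some.inj h
      refine ⟨1 + E.length, ?_⟩
      have hnil : dFilter sA E = [] := hF.symm
      have hlevel := loopA_level endS d E [] sA 1
      rw [levelA_spec, hnil] at hlevel
      rw [if_neg (by simp)] at hlevel
      simp only [List.flatMap_nil, List.map_nil, List.append_nil, List.nil_append] at hlevel
      have hfin : solveLoop endS 1 ([] : List (Int × List (List Char))) (seenUpd sA E)
          = some none := rfl
      rw [hfin] at hlevel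
      exact hlevel
    · simp only [levLoop] at h
      rw [levLevel_eq] at h
      by_cases hex : ∃ t ∈ s0 :: F', endS ∈ kidsB t
      · rw [if_pos hex] at h
        have h' : (some (some (d + 1)) : Option (Option Int)) = some r := h
        obtain rfl : some (d + 1) = r := Option.some.inj h'
        refine ⟨E.length, ?_⟩
        have hlevel := loopA_level endS d E [] sA 0
        rw [levelA_spec] at hlevel
        have hex' : ∃ t ∈ dFilter sA E, endS ∈ kids t := by
          obtain ⟨t, ht, htk⟩ := hex
          have htF : t ∈ dFilter sA E := by rw [← hF]; exact ht
          have ht4 : t.length = 4 := h4 t (dFilter_subset sA E t htF)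
          refine ⟨t, htF, ?_⟩
          rw [← kidsB_eq_kids t ht4]
          exact htk
        rw [if_pos hex'] at hlevel
        simpa using hlevel
      · rw [if_neg hex] at h
        have h' : levLoop endS fB ([] ++ dFilter sB ((s0 :: F').flatMap kidsB))
            (seenUpd sB ((s0 :: F').flatMap kidsB)) (d + 1) = some r := h
        rw [List.nil_append] at h'
        have hmem : ∀ t ∈ s0 :: F', kidsB t = kids t := by
          intro t ht
          have htF : t ∈ dFilter sA E := by rw [← hF]; exact ht
          exact kidsB_eq_kids t (h4 t (dFilter_subset sA E t htF))
        have hCS : (s0 :: F').flatMap kidsB = (s0 :: F').flatMap kids := by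
          rw [List.flatMap_def, List.flatMap_def, List.map_congr_left hmem]
        rw [hCS, hF] at h'
        have hBA : ∀ x, x ∈ sB ↔ x ∈ seenUpd sA E := by
          intro x
          rw [hB x, mem_seenUpd, hF]
        have hF' : dFilter sB ((dFilter sA E).flatMap kids)
            = dFilter (seenUpd sA E) ((dFilter sA E).flatMap kids) :=
          dFilter_congr _ _ _ hBA
        have hB' : ∀ x, x ∈ seenUpd sB ((dFilter sA E).flatMap kids) ↔
            x ∈ seenUpd sA E ∨ x ∈ dFilter sB ((dFilter sA E).flatMap kids) := by
          intro x
          rw [mem_seenUpd, hBA x]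
        have h4' : ∀ t ∈ (dFilter sA E).flatMap kids, t.length = 4 := by
          intro t ht
          obtain ⟨u, hu, htu⟩ := List.mem_flatMap.mp ht
          have hu4 : u.length = 4 := h4 u (dFilter_subset sA E u hu)
          exact (kids_valid u hu4 t htu).1
        obtain ⟨fA', hA'⟩ := ih ((dFilter sA E).flatMap kids)
          (dFilter sB ((dFilter sA E).flatMap kids)) (seenUpd sA E)
          (seenUpd sB ((dFilter sA E).flatMap kids)) (d + 1) r hF' hB' h4' h'
        refine ⟨fA' + E.length, ?_⟩
        have hlevel := loopA_level endS d E [] sA fA'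
        rw [levelA_spec] at hlevel
        have hnex : ¬ ∃ t ∈ dFilter sA E, endS ∈ kids t := by
          rintro ⟨t, ht, htk⟩
          have htF : t ∈ s0 :: F' := by rw [hF]; exact ht
          refine hex ⟨t, htF, ?_⟩
          rw [hmem t htF]
          exact htk
        rw [if_neg hnex] at hlevel
        simp only [List.append_nil, List.nil_append] at hlevel
        rw [hlevel]
        exact hA'

theorem loopA_mono (endS : List (List Char)) (f g : Nat) (hfg : f ≤ g) :
    ∀ (q : List (Int × List (List Char))) (seen : PySem.Set (List (List Char))) (r : Option Int),
      solveLoop endS f q seen = some r → solveLoop endS g q seen = some r := by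
  have hstep : ∀ (f : Nat) (q : List (Int × List (List Char)))
      (seen : PySem.Set (List (List Char))) (r : Option Int),
      solveLoop endS f q seen = some r → solveLoop endS (f + 1) q seen = some r := by
    intro f
    induction f with
    | zero => intro q seen r h; simp [solveLoop] at h
    | succ f ih =>
      intro q seen r h
      rcases q with _ | ⟨⟨d, s⟩, q'⟩
      · simpa [solveLoop] using h
      · by_cases hs : s ∈ seen
        · simp only [solveLoop, hs, if_pos, ite_true] at h ⊢
          exact ih _ _ _ h
        · simp only [solveLoop, hs, if_neg, ite_false] at h ⊢
          rcases he : solveExpandOlds endS d s [0, 1, 2, 3] [] with v | items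
          · simpa [he] using h
          · rw [he] at h
            exact ih _ _ _ h
  intro q seen r h
  obtain ⟨k, rfl⟩ : ∃ k, g = f + k := ⟨g - f, by omega⟩
  clear hfg
  induction k with
  | zero => exact h
  | succ k ihk => exact hstep _ _ _ _ ihk

-- every state with the right multiset appears in this list
def splits4 (p : List Char) : List (List (List Char)) :=
  (List.range (p.length + 1)).flatMap fun i =>
    (List.range (p.length + 1)).flatMap fun j =>
      (List.range (p.length + 1)).map fun k =>
        [p.take i, (p.drop i).take j, ((p.drop i).drop j).take k, ((p.drop i).drop j).drop k]

def allStates (c0 : List Char) : List (List (List Char)) := c0.permutations.flatMap splits4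

theorem mem_allStates (c0 : List Char) (s : List (List Char)) (h4 : s.length = 4)
    (hp : s.flatten.Perm c0) : s ∈ allStates c0 := by
  obtain ⟨a, b, c, d, rfl⟩ := exists_four s h4
  refine List.mem_flatMap.mpr ⟨([a, b, c, d] : List (List Char)).flatten,
    List.mem_permutations.mpr hp, ?_⟩
  have hfl : ([a, b, c, d] : List (List Char)).flatten = a ++ (b ++ (c ++ d)) := by simp
  rw [hfl]
  unfold splits4
  have hlen : (a ++ (b ++ (c ++ d))).length
      = a.length + (b.length + (c.length + d.length)) := by
    simp [List.length_append]
  refine List.mem_flatMap.mpr ⟨a.length, List.mem_range.mpr (by omega), ?_⟩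
  refine List.mem_flatMap.mpr ⟨b.length, List.mem_range.mpr (by omega), ?_⟩
  refine List.mem_map.mpr ⟨c.length, List.mem_range.mpr (by omega), ?_⟩
  rw [List.take_left, List.drop_left, List.take_left, List.drop_left, List.take_left,
    List.drop_left]

theorem length_allStates_le (c0 : List Char) :
    (allStates c0).length ≤ Nat.factorial c0.length * (c0.length + 1) ^ 3 := by
  apply le_of_eq
  unfold allStates
  rw [List.length_flatMap]
  have hsp : ∀ p ∈ c0.permutations, (splits4 p).length = (c0.length + 1) ^ 3 := by
    intro p hp
    have hpl : p.length = c0.length := (List.mem_permutations.mp hp).length_eq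
    unfold splits4
    simp only [List.length_flatMap, List.map_map, Function.comp_def, List.length_map,
      List.length_range, List.map_const', List.sum_replicate, smul_eq_mul, hpl]
    ring
  rw [List.map_congr_left hsp, List.map_const', List.sum_replicate, smul_eq_mul,
    List.length_permutations]

theorem card_le (c0 : List Char) (seen : List (List (List Char))) (hnd : seen.Nodup)
    (hv : ∀ s ∈ seen, s.length = 4 ∧ s.flatten.Perm c0) :
    seen.length ≤ Nat.factorial c0.length * (c0.length + 1) ^ 3 := by
  have hsub : seen ⊆ allStates c0 := fun s hs =>
    mem_allStates c0 s (hv s hs).1 (hv s hs).2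
  exact le_trans (hnd.subperm hsub).length_le (length_allStates_le c0)

theorem totA (endS : List (List Char)) (c0 : List Char) (f : Nat) :
    ∀ (q : List (Int × List (List Char))) (seen : PySem.Set (List (List Char))),
      seen.Nodup →
      (∀ s ∈ seen, s.length = 4 ∧ s.flatten.Perm c0) →
      (∀ p ∈ q, (p.2 : List (List Char)).length = 4 ∧ p.2.flatten.Perm c0) →
      q.length + 13 * (Nat.factorial c0.length * (c0.length + 1) ^ 3 - seen.length) < f →
      solveLoop endS f q seen ≠ none := by
  induction f with
  | zero =>
    intro q seen _ _ _ hfuel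
    exact absurd hfuel (Nat.not_lt_zero _)
  | succ f ih =>
    intro q seen hnd hv hq hfuel
    rcases q with _ | ⟨⟨d, s⟩, q'⟩
    · simp [solveLoop]
    · simp only [solveLoop]
      by_cases hs : s ∈ seen
      · rw [if_pos hs]
        refine ih q' seen hnd hv (fun p hp => hq p (List.mem_cons_of_mem _ hp)) ?_
        simp only [List.length_cons] at hfuel
        omega
      · rw [if_neg hs, expandOlds_eq]
        have hfold : List.flatMap (kidsOf s) [0, 1, 2, 3] = kids s := rfl
        rw [hfold]
        by_cases hk : endS ∈ kids s
        · rw [if_pos hk]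
          simp
        · rw [if_neg hk, List.nil_append]
          show solveLoop endS f (q' ++ (kids s).map fun c => (d + 1, c))
              (PySem.Set.add seen s) ≠ none
          have hvs := hq (d, s) (by simp)
          have hnd' : (PySem.Set.add seen s).Nodup := PySem.Set.nodup_add _ _ hnd
          have hv' : ∀ t ∈ PySem.Set.add seen s, t.length = 4 ∧ t.flatten.Perm c0 := by
            intro t ht
            rw [PySem.Set.mem_add] at ht
            rcases ht with h1 | rfl
            · exact hv t h1
            · exact hvs
          refine ih _ _ hnd' hv' ?_ ?_
          · intro p hp
            rcases List.mem_append.mp hp with h1 | h2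
            · exact hq p (List.mem_cons_of_mem _ h1)
            · obtain ⟨c, hc, rfl⟩ := List.mem_map.mp h2
              have hcv := kids_valid s hvs.1 c hc
              exact ⟨hcv.1, hcv.2.trans hvs.2⟩
          · have hlen : ((kids s).map fun c => ((d : Int) + 1, c)).length ≤ 12 := by
              rw [List.length_map]
              exact kids_length_le s
            have hcard : (PySem.Set.add seen s).length
                ≤ Nat.factorial c0.length * (c0.length + 1) ^ 3 :=
              card_le c0 _ hnd' hv'
            have hadd : (PySem.Set.add seen s).length = seen.length + 1 := by
              rw [PySem.Set.add_of_not_mem hs]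
              simp
            simp only [List.length_append, List.length_cons] at hfuel ⊢
            omega

theorem totLev (endS : List (List Char)) (c0 : List Char) (f : Nat) :
    ∀ (F : List (List (List Char))) (seen : PySem.Set (List (List Char))) (d : Int),
      seen.Nodup →
      (∀ s ∈ seen, s.length = 4 ∧ s.flatten.Perm c0) →
      (∀ s ∈ F, s.length = 4 ∧ s.flatten.Perm c0) →
      Nat.factorial c0.length * (c0.length + 1) ^ 3 - seen.length + 2 ≤ f →
      levLoop endS f F seen d ≠ none := by
  induction f with
  | zero =>
    intro F seen d _ _ _ hfuel
    exact absurd hfuel (by omega)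
  | succ f ih =>
    intro F seen d hnd hv hF hfuel
    rcases F with _ | ⟨s0, F'⟩
    · simp [levLoop]
    · simp only [levLoop]
      rw [levLevel_eq]
      by_cases hex : ∃ t ∈ s0 :: F', endS ∈ kidsB t
      · rw [if_pos hex]
        simp
      · rw [if_neg hex]
        show levLoop endS f
            (([] : List (List (List Char))) ++ dFilter seen ((s0 :: F').flatMap kidsB))
            (seenUpd seen ((s0 :: F').flatMap kidsB)) (d + 1) ≠ none
        rw [List.nil_append]
        have hvCS : ∀ t ∈ (s0 :: F').flatMap kidsB, t.length = 4 ∧ t.flatten.Perm c0 := by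
          intro t ht
          obtain ⟨u, hu, htu⟩ := List.mem_flatMap.mp ht
          have hu4 := hF u hu
          rw [kidsB_eq_kids u hu4.1] at htu
          have hcv := kids_valid u hu4.1 t htu
          exact ⟨hcv.1, hcv.2.trans hu4.2⟩
        have hnd' := seenUpd_nodup seen ((s0 :: F').flatMap kidsB) hnd
        have hv' : ∀ t ∈ seenUpd seen ((s0 :: F').flatMap kidsB),
            t.length = 4 ∧ t.flatten.Perm c0 := by
          intro t ht
          rcases (mem_seenUpd seen _ t).mp ht with h1 | h2
          · exact hv t h1
          · exact hvCS t (dFilter_subset _ _ _ h2)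
        have hvF' : ∀ t ∈ dFilter seen ((s0 :: F').flatMap kidsB),
            t.length = 4 ∧ t.flatten.Perm c0 :=
          fun t ht => hvCS t (dFilter_subset _ _ _ ht)
        by_cases hnil : dFilter seen ((s0 :: F').flatMap kidsB) = []
        · rw [hnil]
          obtain ⟨f', rfl⟩ : ∃ f', f = f' + 1 := ⟨f - 1, by omega⟩
          simp [levLoop]
        · refine ih _ _ _ hnd' hv' hvF' ?_
          have hlen := seenUpd_length seen ((s0 :: F').flatMap kidsB)
          have hcard := card_le c0 _ hnd' hv'
          have hne : (dFilter seen ((s0 :: F').flatMap kidsB)).length ≠ 0 :=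
            fun h0 => hnil (List.length_eq_zero_iff.mp h0)
          omega

theorem normalize_eq_map (l : List (List Char)) (h : l.length = 4) :
    solveNormalize l = l.map (fun t => if t = ['0'] then [] else t) := by
  obtain ⟨a, b, c, d, rfl⟩ := exists_four l h
  rfl

-- states reachable in exactly n moves (with multiplicity; membership is what matters)
def nthKids (a : List (List Char)) : Nat → List (List (List Char))
  | 0 => [a]
  | n + 1 => (nthKids a n).flatMap kids

-- x is at BFS distance exactly d from a
def minLv (a x : List (List Char)) (d : Nat) : Prop :=
  x ∈ nthKids a d ∧ ∀ k < d, x ∉ nthKids a k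

theorem mem_nthKids_succ (a x : List (List Char)) (n : Nat) :
    x ∈ nthKids a (n + 1) ↔ ∃ y ∈ nthKids a n, x ∈ kids y := by
  simp [nthKids, List.mem_flatMap]

theorem nthKids_len4 (a : List (List Char)) (h4 : a.length = 4) :
    ∀ (n : Nat) (x : List (List Char)), x ∈ nthKids a n → x.length = 4 := by
  intro n
  induction n with
  | zero => intro x hx; rw [nthKids] at hx; simpa [List.mem_singleton.mp hx]
  | succ n ih =>
    intro x hx
    obtain ⟨y, hy, hxy⟩ := (mem_nthKids_succ a x n).mp hx
    exact (kids_valid y (ih y hy) x hxy).1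

theorem nthKids_comp (a : List (List Char)) (m n : Nat) (x : List (List Char)) :
    x ∈ nthKids a (m + n) ↔ ∃ y ∈ nthKids a m, x ∈ nthKids y n := by
  induction n generalizing x with
  | zero =>
    constructor
    · intro hx; exact ⟨x, hx, by simp [nthKids]⟩
    · rintro ⟨y, hy, hxy⟩
      rw [nthKids] at hxy
      rw [List.mem_singleton.mp hxy]
      exact hy
  | succ n ih =>
    constructor
    · intro hx
      obtain ⟨z, hz, hxz⟩ := (mem_nthKids_succ a x (m + n)).mp hx
      obtain ⟨y, hy, hzy⟩ := (ih z).mp hz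
      exact ⟨y, hy, (mem_nthKids_succ y x n).mpr ⟨z, hzy, hxz⟩⟩
    · rintro ⟨y, hy, hxy⟩
      obtain ⟨z, hz, hxz⟩ := (mem_nthKids_succ y x n).mp hxy
      exact (mem_nthKids_succ a x (m + n)).mpr ⟨z, (ih z).mpr ⟨y, hy, hz⟩, hxz⟩

theorem nthKids_symm (a : List (List Char)) (h4 : a.length = 4) :
    ∀ (n : Nat) (x : List (List Char)), x ∈ nthKids a n → a ∈ nthKids x n := by
  intro n
  induction n with
  | zero =>
    intro x hx
    rw [nthKids] at hx
    rw [List.mem_singleton.mp hx]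
    simp [nthKids]
  | succ n ih =>
    intro x hx
    obtain ⟨y, hy, hxy⟩ := (mem_nthKids_succ a x n).mp hx
    have hy4 : y.length = 4 := nthKids_len4 a h4 n y hy
    have hyx : y ∈ kids x := kids_symm y x hy4 hxy
    have hcomp : a ∈ nthKids x (1 + n) :=
      (nthKids_comp x 1 n a).mpr ⟨y, by simpa [nthKids] using hyx, ih y hy⟩
    rwa [Nat.add_comm] at hcomp

theorem minLv_exists (a x : List (List Char)) (n : Nat) (hx : x ∈ nthKids a n) :
    ∃ d ≤ n, minLv a x d := by
  induction n using Nat.strong_induction_on with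
  | _ n ih =>
    by_cases h : ∃ k < n, x ∈ nthKids a k
    · obtain ⟨k, hk, hxk⟩ := h
      obtain ⟨d, hd, hmin⟩ := ih k hk hxk
      exact ⟨d, by omega, hmin⟩
    · push_neg at h
      exact ⟨n, le_refl n, hx, h⟩

theorem minLv_unique (a x : List (List Char)) (d1 d2 : Nat)
    (h1 : minLv a x d1) (h2 : minLv a x d2) : d1 = d2 := by
  by_contra hne
  rcases Nat.lt_or_ge d1 d2 with h | h
  · exact h2.2 d1 h h1.1
  · exact h1.2 d2 (by omega) h2.1

theorem minLv_parent (a x : List (List Char)) (d : Nat) (h : minLv a x (d + 1)) :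
    ∃ y, minLv a y d ∧ x ∈ kids y := by
  obtain ⟨y, hy, hxy⟩ := (mem_nthKids_succ a x d).mp h.1
  obtain ⟨k, hk, hmin⟩ := minLv_exists a y d hy
  rcases Nat.lt_or_ge k d with hlt | hge
  · exact absurd ((mem_nthKids_succ a x k).mpr ⟨y, hmin.1, hxy⟩) (h.2 (k + 1) (by omega))
  · obtain rfl : k = d := by omega
    exact ⟨y, hmin, hxy⟩

theorem sphere_nonempty (a : List (List Char)) :
    ∀ (D : Nat) (t : List (List Char)), minLv a t D → ∀ k ≤ D, ∃ y, minLv a y k := by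
  intro D
  induction D with
  | zero =>
    intro t ht k hk
    obtain rfl : k = 0 := by omega
    exact ⟨t, ht⟩
  | succ D ih =>
    intro t ht k hk
    rcases Nat.eq_or_lt_of_le hk with rfl | hlt
    · exact ⟨t, ht⟩
    · obtain ⟨y, hy, _⟩ := minLv_parent a t D ht
      exact ih y hy k (by omega)

-- goal-hit at one level: the frontier generates t iff t sits at distance d+1
theorem hit_iff (a t : List (List Char)) (F : List (List (List Char))) (d : Nat)
    (hF : ∀ x, x ∈ F ↔ minLv a x d) (hnt : ∀ k ≤ d, t ∉ nthKids a k) :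
    (∃ y ∈ F, t ∈ kids y) ↔ minLv a t (d + 1) := by
  constructor
  · rintro ⟨y, hyF, hty⟩
    have hy := (hF y).mp hyF
    refine ⟨(mem_nthKids_succ a t d).mpr ⟨y, hy.1, hty⟩, ?_⟩
    intro k hk
    exact hnt k (by omega)
  · intro h
    obtain ⟨y, hy, hty⟩ := minLv_parent a t d h
    exact ⟨y, (hF y).mpr hy, hty⟩

-- one level of sphere growth: new frontier = sphere (d+1), new seen = ball (d+1)
theorem level_step (a : List (List Char)) (d : Nat) (F : List (List (List Char)))
    (seen : PySem.Set (List (List Char))) (C : List (List (List Char)))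
    (hC : ∀ x, x ∈ C ↔ ∃ y ∈ F, x ∈ kids y)
    (hF : ∀ x, x ∈ F ↔ minLv a x d)
    (hseen : ∀ x, x ∈ seen ↔ ∃ k ≤ d, minLv a x k) :
    (∀ x, x ∈ dFilter seen C ↔ minLv a x (d + 1)) ∧
    (∀ x, x ∈ seenUpd seen C ↔ ∃ k ≤ d + 1, minLv a x k) := by
  have hF' : ∀ x, x ∈ dFilter seen C ↔ minLv a x (d + 1) := by
    intro x
    rw [mem_dFilter, hC, hseen]
    constructor
    · rintro ⟨⟨y, hyF, hxy⟩, hns⟩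
      have hy := (hF y).mp hyF
      have hx1 : x ∈ nthKids a (d + 1) := (mem_nthKids_succ a x d).mpr ⟨y, hy.1, hxy⟩
      obtain ⟨k, hk, hmin⟩ := minLv_exists a x (d + 1) hx1
      rcases Nat.eq_or_lt_of_le hk with rfl | hlt
      · exact hmin
      · exact absurd ⟨k, by omega, hmin⟩ hns
    · intro h
      obtain ⟨y, hy, hxy⟩ := minLv_parent a x d h
      refine ⟨⟨y, (hF y).mpr hy, hxy⟩, ?_⟩
      rintro ⟨k, hk, hmin⟩
      exact h.2 k (by omega) hmin.1
  refine ⟨hF', fun x => ?_⟩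
  rw [mem_seenUpd, hseen]
  constructor
  · rintro (⟨k, hk, hmin⟩ | hx)
    · exact ⟨k, by omega, hmin⟩
    · exact ⟨d + 1, le_refl _, (hF' x).mp hx⟩
  · rintro ⟨k, hk, hmin⟩
    rcases Nat.lt_or_ge k (d + 1) with hlt | hge
    · exact Or.inl ⟨k, by omega, hmin⟩
    · obtain rfl : k = d + 1 := by omega
      exact Or.inr ((hF' x).mpr hmin)

-- full characterization of the reference level BFS: a `some v` answer is the BFS
-- distance from a to t, a `none` answer means t is unreachable from a
theorem levChar (a t : List (List Char)) (h4 : a.length = 4) :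
    ∀ (fuel : Nat) (F : List (List (List Char))) (seen : PySem.Set (List (List Char)))
      (dN : Nat) (r : Option Int),
      (∀ x, x ∈ F ↔ minLv a x dN) →
      (∀ x, x ∈ seen ↔ ∃ k ≤ dN, minLv a x k) →
      (∀ k ≤ dN, t ∉ nthKids a k) →
      levLoop t fuel F seen (dN : Int) = some r →
      (∀ v, r = some v → ∃ D, minLv a t D ∧ v = (D : Int)) ∧
      (r = none → ∀ n, t ∉ nthKids a n) := by
  intro fuel
  induction fuel with
  | zero =>
    intro F seen dN r _ _ _ h
    simp [levLoop] at h
  | succ fuel ih =>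
    intro F seen dN r hF hseen hnt h
    rcases F with _ | ⟨s0, F'⟩
    · simp only [levLoop] at h
      obtain rfl : (none : Option Int) = r := Option.some.inj h
      refine ⟨by simp, fun _ n hn => ?_⟩
      obtain ⟨D, hDn, hmin⟩ := minLv_exists a t n hn
      rcases Nat.lt_or_ge dN D with hlt | hge
      · obtain ⟨y, hy⟩ := sphere_nonempty a D t hmin dN (by omega)
        exact absurd ((hF y).mpr hy) (by simp)
      · exact hnt D hge hmin.1
    · have h44 : ∀ x ∈ s0 :: F', x.length = 4 :=
        fun x hx => nthKids_len4 a h4 dN x ((hF x).mp hx).1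
      have hkb : ∀ x ∈ s0 :: F', kidsB x = kids x := fun x hx => kidsB_eq_kids x (h44 x hx)
      have hCeq : (s0 :: F').flatMap kidsB = (s0 :: F').flatMap kids := by
        rw [List.flatMap_def, List.flatMap_def, List.map_congr_left hkb]
      have hCmem : ∀ x, x ∈ (s0 :: F').flatMap kidsB ↔ ∃ y ∈ s0 :: F', x ∈ kids y := by
        intro x
        rw [hCeq, List.mem_flatMap]
      simp only [levLoop] at h
      rw [levLevel_eq] at h
      by_cases hex : ∃ s ∈ s0 :: F', t ∈ kidsB s
      · rw [if_pos hex] at h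
        obtain rfl : (some ((dN : Int) + 1) : Option Int) = r := Option.some.inj h
        have hex' : ∃ s ∈ s0 :: F', t ∈ kids s := by
          obtain ⟨y, hy, hty⟩ := hex
          exact ⟨y, hy, by rwa [hkb y hy] at hty⟩
        have hmin : minLv a t (dN + 1) := (hit_iff a t (s0 :: F') dN hF hnt).mp hex'
        refine ⟨fun v hv => ⟨dN + 1, hmin, ?_⟩, by simp⟩
        obtain rfl : v = (dN : Int) + 1 := (Option.some.inj hv).symm
        push_cast
        ring
      · rw [if_neg hex] at h
        have hnex' : ¬ ∃ s ∈ s0 :: F', t ∈ kids s := by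
          rintro ⟨y, hy, hty⟩
          exact hex ⟨y, hy, by rwa [hkb y hy]⟩
        have hstep := level_step a dN (s0 :: F') seen ((s0 :: F').flatMap kidsB) hCmem hF hseen
        have hnt' : ∀ k ≤ dN + 1, t ∉ nthKids a k := by
          intro k hk htk
          rcases Nat.lt_or_ge k (dN + 1) with hlt | hge
          · exact hnt k (by omega) htk
          · obtain rfl : k = dN + 1 := by omega
            obtain ⟨D, hD, hmin⟩ := minLv_exists a t (dN + 1) htk
            rcases Nat.lt_or_ge D (dN + 1) with hlt2 | hge2
            · exact hnt D (by omega) hmin.1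
            · obtain rfl : D = dN + 1 := by omega
              exact hnex' ((hit_iff a t (s0 :: F') dN hF hnt).mpr hmin)
        have hcast : (dN : Int) + 1 = ((dN + 1 : Nat) : Int) := by push_cast; rfl
        rw [List.nil_append] at h
        rw [hcast] at h
        exact ih _ _ (dN + 1) r hstep.1 hstep.2 hnt' h

-- closed form of B's inner loops: `none` iff some generated child is seen from the other side
theorem bNews_eq (seenOther : PySem.Set (List (List Char))) (s : List (List Char)) (o : Nat)
    (rest : List Char) (elem : Char) (ns : List Nat)
    (p : PySem.Set (List (List Char)) × List (List (List Char))) :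
    bNews seenOther s o rest elem ns p =
      (if ∃ c ∈ ns.filterMap (fun n => if n = o then none
            else some (solveAltChild s o n rest elem)), c ∈ seenOther
       then none
       else some (seenUpd p.1 (ns.filterMap (fun n => if n = o then none
            else some (solveAltChild s o n rest elem))),
          p.2 ++ dFilter p.1 (ns.filterMap (fun n => if n = o then none
            else some (solveAltChild s o n rest elem))))) := by
  induction ns generalizing p with
  | nil => simp [bNews, seenUpd, dFilter]
  | cons n ns ih =>
    obtain ⟨pse, pnx⟩ := p
    by_cases h : n = o
    · subst h
      have hred : List.filterMap (fun m => if m = n then none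
            else some (solveAltChild s n m rest elem)) (n :: ns)
          = List.filterMap (fun m => if m = n then none
            else some (solveAltChild s n m rest elem)) ns := by
        rw [List.filterMap_cons, if_pos rfl]
      simp only [bNews, if_pos rfl, ite_true, hred]
      exact ih (pse, pnx)
    · by_cases hg : solveAltChild s o n rest elem ∈ seenOther
      · simp [bNews, h, hg, List.filterMap_cons]
      · have hiff : (∃ c ∈ solveAltChild s o n rest elem :: ns.filterMap (fun n =>
            if n = o then none else some (solveAltChild s o n rest elem)), c ∈ seenOther) ↔
            (∃ c ∈ ns.filterMap (fun n => if n = o then none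
              else some (solveAltChild s o n rest elem)), c ∈ seenOther) := by
          constructor
          · rintro ⟨c, hc, hcs⟩
            rcases List.mem_cons.mp hc with rfl | hc
            · exact absurd hcs hg
            · exact ⟨c, hc, hcs⟩
          · rintro ⟨c, hc, hcs⟩
            exact ⟨c, List.mem_cons_of_mem _ hc, hcs⟩
        by_cases hseen : solveAltChild s o n rest elem ∈ pse
        · simp only [bNews, h, hg, if_neg, ite_false, hseen, if_pos, ite_true,
            List.filterMap_cons]
          rw [ih]
          by_cases hex : ∃ c ∈ ns.filterMap (fun n => if n = o then none
              else some (solveAltChild s o n rest elem)), c ∈ seenOther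
          · rw [if_pos hex, if_pos (hiff.mpr hex)]
          · rw [if_neg hex, if_neg (fun hh => hex (hiff.mp hh))]
            simp [seenUpd, dFilter, hseen]
        · simp only [bNews, h, hg, if_neg, ite_false, hseen, List.filterMap_cons]
          rw [ih]
          by_cases hex : ∃ c ∈ ns.filterMap (fun n => if n = o then none
              else some (solveAltChild s o n rest elem)), c ∈ seenOther
          · rw [if_pos hex, if_pos (hiff.mpr hex)]
          · rw [if_neg hex, if_neg (fun hh => hex (hiff.mp hh))]
            simp [seenUpd, dFilter, hseen, List.append_assoc]

theorem bOlds_eq (seenOther : PySem.Set (List (List Char))) (s : List (List Char))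
    (os : List Nat) (p : PySem.Set (List (List Char)) × List (List (List Char))) :
    bOlds seenOther s os p =
      (if ∃ c ∈ os.flatMap (kidsBOf s), c ∈ seenOther then none
       else some (seenUpd p.1 (os.flatMap (kidsBOf s)),
          p.2 ++ dFilter p.1 (os.flatMap (kidsBOf s)))) := by
  induction os generalizing p with
  | nil => simp [bOlds, seenUpd, dFilter]
  | cons o os ih =>
    obtain ⟨pse, pnx⟩ := p
    rw [List.flatMap_cons]
    by_cases he : s.getD o [] = []
    · have hk0 : kidsBOf s o = [] := by rw [kidsBOf, if_pos he]
      rw [hk0, List.nil_append]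
      simp only [bOlds]
      rw [if_pos he, ih]
    · have hk : kidsBOf s o = List.filterMap (fun n => if n = o then none
          else some (solveAltChild s o n ((s.getD o []).dropLast)
            ((s.getD o []).getLast?.getD ' '))) [0, 1, 2, 3] := by
        rw [kidsBOf, if_neg he]
      simp only [bOlds]
      rw [if_neg he, bNews_eq, ← hk]
      by_cases hm : ∃ c ∈ kidsBOf s o, c ∈ seenOther
      · rw [if_pos hm, if_pos]
        obtain ⟨c, hc, hcs⟩ := hm
        exact ⟨c, List.mem_append.mpr (Or.inl hc), hcs⟩
      · rw [if_neg hm]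
        show bOlds seenOther s os
            (seenUpd pse (kidsBOf s o), pnx ++ dFilter pse (kidsBOf s o)) = _
        rw [ih]
        by_cases hm2 : ∃ c ∈ List.flatMap (kidsBOf s) os, c ∈ seenOther
        · rw [if_pos hm2, if_pos]
          obtain ⟨c, hc, hcs⟩ := hm2
          exact ⟨c, List.mem_append.mpr (Or.inr hc), hcs⟩
        · rw [if_neg hm2, if_neg]
          · simp [dFilter_append, seenUpd_append, List.append_assoc]
          · rintro ⟨c, hc, hcs⟩
            rcases List.mem_append.mp hc with h1 | h2
            · exact hm ⟨c, h1, hcs⟩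
            · exact hm2 ⟨c, h2, hcs⟩

theorem bExpand_eq (seenOther : PySem.Set (List (List Char))) (F : List (List (List Char)))
    (p : PySem.Set (List (List Char)) × List (List (List Char))) :
    bExpand seenOther F p =
      (if ∃ c ∈ F.flatMap kidsB, c ∈ seenOther then none
       else some (seenUpd p.1 (F.flatMap kidsB), p.2 ++ dFilter p.1 (F.flatMap kidsB))) := by
  induction F generalizing p with
  | nil => simp [bExpand, seenUpd, dFilter]
  | cons s F ih =>
    obtain ⟨pse, pnx⟩ := p
    simp only [bExpand]
    rw [bOlds_eq]
    have hkb : List.flatMap (kidsBOf s) [0, 1, 2, 3] = kidsB s := rfl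
    rw [hkb]
    have hiff : (∃ c ∈ (s :: F).flatMap kidsB, c ∈ seenOther) ↔
        ((∃ c ∈ kidsB s, c ∈ seenOther) ∨ ∃ c ∈ F.flatMap kidsB, c ∈ seenOther) := by
      rw [List.flatMap_cons]
      constructor
      · rintro ⟨c, hc, hcs⟩
        rcases List.mem_append.mp hc with h1 | h2
        · exact Or.inl ⟨c, h1, hcs⟩
        · exact Or.inr ⟨c, h2, hcs⟩
      · rintro (⟨c, hc, hcs⟩ | ⟨c, hc, hcs⟩)
        · exact ⟨c, List.mem_append.mpr (Or.inl hc), hcs⟩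
        · exact ⟨c, List.mem_append.mpr (Or.inr hc), hcs⟩
    by_cases hm : ∃ c ∈ kidsB s, c ∈ seenOther
    · rw [if_pos hm, if_pos (hiff.mpr (Or.inl hm))]
    · rw [if_neg hm]
      show bExpand seenOther F
          (seenUpd pse (kidsB s), pnx ++ dFilter pse (kidsB s)) = _
      rw [ih]
      by_cases hm2 : ∃ c ∈ F.flatMap kidsB, c ∈ seenOther
      · rw [if_pos hm2, if_pos (hiff.mpr (Or.inr hm2))]
      · rw [if_neg hm2, if_neg (fun hh => (hiff.mp hh).elim hm hm2)]
        simp [List.flatMap_cons, dFilter_append, seenUpd_append, List.append_assoc]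

-- while the two searches have not met, the distance between the roots exceeds i + j
theorem nohit_D_lb (a b : List (List Char)) (h4a : a.length = 4) (i j D : Nat)
    (nohit : ∀ x k l, k ≤ i → l ≤ j → x ∈ nthKids a k → x ∈ nthKids b l → False)
    (hD : b ∈ nthKids a D) : i + j + 1 ≤ D := by
  by_contra hcon
  push_neg at hcon
  obtain ⟨k, hk, hDk, hkD⟩ : ∃ k, k ≤ i ∧ D - k ≤ j ∧ k ≤ D := ⟨D - min D j, by omega, by omega, by omega⟩
  have hsplit : b ∈ nthKids a (k + (D - k)) := by
    rwa [Nat.add_sub_cancel' hkD]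
  obtain ⟨x, hxa, hbx⟩ := (nthKids_comp a k (D - k) b).mp hsplit
  have hx4 : x.length = 4 := nthKids_len4 a h4a k x hxa
  have hxb : x ∈ nthKids b (D - k) := nthKids_symm x hx4 (D - k) b hbx
  exact nohit x k (D - k) hk hDk hxa hxb

-- full characterization of B's bidirectional loop: same answers as the level BFS
theorem bChar (a b : List (List Char)) (h4a : a.length = 4) (h4b : b.length = 4) :
    ∀ (fuel : Nat) (fS fT : List (List (List Char)))
      (seenS seenT : PySem.Set (List (List Char))) (m : Nat) (r : Option Int),
      (∀ x, x ∈ fS ↔ minLv a x ((m + 1) / 2)) →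
      (∀ x, x ∈ fT ↔ minLv b x (m / 2)) →
      (∀ x, x ∈ seenS ↔ ∃ k ≤ (m + 1) / 2, minLv a x k) →
      (∀ x, x ∈ seenT ↔ ∃ l ≤ m / 2, minLv b x l) →
      (∀ x k l, k ≤ (m + 1) / 2 → l ≤ m / 2 →
        x ∈ nthKids a k → x ∈ nthKids b l → False) →
      bLoop fuel fS fT seenS seenT m = some r →
      (∀ v, r = some v → ∃ D, minLv a b D ∧ v = (D : Int)) ∧
      (r = none → ∀ n, b ∉ nthKids a n) := by
  intro fuel
  induction fuel with
  | zero =>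
    intro fS fT seenS seenT m r _ _ _ _ _ h
    simp [bLoop] at h
  | succ fuel ih =>
    intro fS fT seenS seenT m r hfS hfT hsS hsT nohit h
    simp only [bLoop] at h
    by_cases hempty : fS = [] ∨ fT = []
    · rw [if_pos hempty] at h
      obtain rfl : (none : Option Int) = r := Option.some.inj h
      refine ⟨by simp, fun _ n hn => ?_⟩
      obtain ⟨D, hDn, hmin⟩ := minLv_exists a b n hn
      have hlb : (m + 1) / 2 + m / 2 + 1 ≤ D := nohit_D_lb a b h4a _ _ D nohit hmin.1
      rcases hempty with he | he
      · obtain ⟨y, hy⟩ := sphere_nonempty a D b hmin ((m + 1) / 2) (by omega)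
        exact absurd ((hfS y).mpr hy) (by simp [he])
      · have hsymmD : minLv b a D := by
          refine ⟨nthKids_symm a h4a D b hmin.1, ?_⟩
          intro k hk hak
          exact hmin.2 k hk (nthKids_symm b h4b k a hak)
        obtain ⟨y, hy⟩ := sphere_nonempty b D a hsymmD (m / 2) (by omega)
        exact absurd ((hfT y).mpr hy) (by simp [he])
    · rw [if_neg hempty] at h
      by_cases hpar : m % 2 = 0
      · -- expand the start side
        rw [if_pos hpar, bExpand_eq] at h
        have hij : (m + 1) / 2 = m / 2 := by omega
        have h44 : ∀ x ∈ fS, x.length = 4 :=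
          fun x hx => nthKids_len4 a h4a _ x ((hfS x).mp hx).1
        have hkb : ∀ x ∈ fS, kidsB x = kids x := fun x hx => kidsB_eq_kids x (h44 x hx)
        have hCeq : fS.flatMap kidsB = fS.flatMap kids := by
          rw [List.flatMap_def, List.flatMap_def, List.map_congr_left hkb]
        have hCmem : ∀ x, x ∈ fS.flatMap kidsB ↔ ∃ y ∈ fS, x ∈ kids y := by
          intro x
          rw [hCeq, List.mem_flatMap]
        by_cases hhit : ∃ c ∈ fS.flatMap kidsB, c ∈ seenT
        · rw [if_pos hhit] at h
          obtain rfl : (some ((m : Int) + 1) : Option Int) = r := Option.some.inj h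
          obtain ⟨c, hcC, hcT⟩ := hhit
          obtain ⟨y, hyF, hcy⟩ := (hCmem c).mp hcC
          have hcA : c ∈ nthKids a ((m + 1) / 2 + 1) :=
            (mem_nthKids_succ a c ((m + 1) / 2)).mpr ⟨y, ((hfS y).mp hyF).1, hcy⟩
          obtain ⟨l, hl, hml⟩ := (hsT c).mp hcT
          have hbc : b ∈ nthKids c l := nthKids_symm b h4b l c hml.1
          have hab : b ∈ nthKids a ((m + 1) / 2 + 1 + l) :=
            (nthKids_comp a ((m + 1) / 2 + 1) l b).mpr ⟨c, hcA, hbc⟩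
          obtain ⟨D, hD, hminD⟩ := minLv_exists a b _ hab
          have hlb : (m + 1) / 2 + m / 2 + 1 ≤ D := nohit_D_lb a b h4a _ _ D nohit hminD.1
          have hDm : D = m + 1 := by omega
          refine ⟨fun v hv => ⟨D, hminD, ?_⟩, by simp⟩
          obtain rfl : v = (m : Int) + 1 := (Option.some.inj hv).symm
          rw [hDm]
          push_cast
          ring
        · rw [if_neg hhit] at h
          replace h : bLoop fuel ([] ++ dFilter seenS (fS.flatMap kidsB)) fT
              (seenUpd seenS (fS.flatMap kidsB)) seenT (m + 1) = some r := h
          rw [List.nil_append] at h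
          have hstep := level_step a (m / 2) fS seenS (fS.flatMap kidsB) hCmem
            (by intro x; rw [← hij]; exact hfS x)
            (by intro x; rw [← hij]; exact hsS x)
          have e1 : (m + 1 + 1) / 2 = m / 2 + 1 := by omega
          have e2 : (m + 1) / 2 = m / 2 := hij
          have nohit' : ∀ x k l, k ≤ (m + 1 + 1) / 2 → l ≤ (m + 1) / 2 →
              x ∈ nthKids a k → x ∈ nthKids b l → False := by
            intro x k l hk hl hxa hxb
            rw [e1] at hk
            rw [e2] at hl
            obtain ⟨k0, hk0, hmk⟩ := minLv_exists a x k hxa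
            obtain ⟨l0, hl0, hml⟩ := minLv_exists b x l hxb
            rcases Nat.lt_or_ge k0 (m / 2 + 1) with hlt | hge
            · exact nohit x k0 l0 (by omega) (by omega) hmk.1 hml.1
            · obtain rfl : k0 = m / 2 + 1 := by omega
              obtain ⟨y, hy, hxy⟩ := minLv_parent a x (m / 2) hmk
              refine hhit ⟨x, (hCmem x).mpr ⟨y, ?_, hxy⟩, (hsT x).mpr ⟨l0, by omega, hml⟩⟩
              rw [hfS y, e2]
              exact hy
          refine ih _ fT _ seenT (m + 1) r ?_ ?_ ?_ ?_ nohit' h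
          · intro x
            rw [e1]
            exact hstep.1 x
          · intro x
            rw [e2]
            exact hfT x
          · intro x
            rw [e1]
            exact hstep.2 x
          · intro x
            rw [e2]
            exact hsT x
      · -- expand the end side
        rw [if_neg hpar, bExpand_eq] at h
        have hodd : m % 2 = 1 := by omega
        have h44 : ∀ x ∈ fT, x.length = 4 :=
          fun x hx => nthKids_len4 b h4b _ x ((hfT x).mp hx).1
        have hkb : ∀ x ∈ fT, kidsB x = kids x := fun x hx => kidsB_eq_kids x (h44 x hx)
        have hCeq : fT.flatMap kidsB = fT.flatMap kids := by
          rw [List.flatMap_def, List.flatMap_def, List.map_congr_left hkb]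
        have hCmem : ∀ x, x ∈ fT.flatMap kidsB ↔ ∃ y ∈ fT, x ∈ kids y := by
          intro x
          rw [hCeq, List.mem_flatMap]
        by_cases hhit : ∃ c ∈ fT.flatMap kidsB, c ∈ seenS
        · rw [if_pos hhit] at h
          obtain rfl : (some ((m : Int) + 1) : Option Int) = r := Option.some.inj h
          obtain ⟨c, hcC, hcS⟩ := hhit
          obtain ⟨y, hyF, hcy⟩ := (hCmem c).mp hcC
          have hcB : c ∈ nthKids b (m / 2 + 1) :=
            (mem_nthKids_succ b c (m / 2)).mpr ⟨y, ((hfT y).mp hyF).1, hcy⟩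
          obtain ⟨k, hk, hmk⟩ := (hsS c).mp hcS
          have hbc : b ∈ nthKids c (m / 2 + 1) := nthKids_symm b h4b (m / 2 + 1) c hcB
          have hab : b ∈ nthKids a (k + (m / 2 + 1)) :=
            (nthKids_comp a k (m / 2 + 1) b).mpr ⟨c, hmk.1, hbc⟩
          obtain ⟨D, hD, hminD⟩ := minLv_exists a b _ hab
          have hlb : (m + 1) / 2 + m / 2 + 1 ≤ D := nohit_D_lb a b h4a _ _ D nohit hminD.1
          have hDm : D = m + 1 := by omega
          refine ⟨fun v hv => ⟨D, hminD, ?_⟩, by simp⟩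
          obtain rfl : v = (m : Int) + 1 := (Option.some.inj hv).symm
          rw [hDm]
          push_cast
          ring
        · rw [if_neg hhit] at h
          replace h : bLoop fuel fS ([] ++ dFilter seenT (fT.flatMap kidsB))
              seenS (seenUpd seenT (fT.flatMap kidsB)) (m + 1) = some r := h
          rw [List.nil_append] at h
          have hstep := level_step b (m / 2) fT seenT (fT.flatMap kidsB) hCmem hfT hsT
          have e1 : (m + 1) / 2 = m / 2 + 1 := by omega
          have e2 : (m + 1 + 1) / 2 = (m + 1) / 2 := by omega
          have nohit' : ∀ x k l, k ≤ (m + 1 + 1) / 2 → l ≤ (m + 1) / 2 →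
              x ∈ nthKids a k → x ∈ nthKids b l → False := by
            intro x k l hk hl hxa hxb
            rw [e2, e1] at hk
            rw [e1] at hl
            obtain ⟨k0, hk0, hmk⟩ := minLv_exists a x k hxa
            obtain ⟨l0, hl0, hml⟩ := minLv_exists b x l hxb
            rcases Nat.lt_or_ge l0 (m / 2 + 1) with hlt | hge
            · exact nohit x k0 l0 (by omega) (by omega) hmk.1 hml.1
            · obtain rfl : l0 = m / 2 + 1 := by omega
              obtain ⟨y, hy, hxy⟩ := minLv_parent b x (m / 2) hml
              refine hhit ⟨x, (hCmem x).mpr ⟨y, (hfT y).mpr hy, hxy⟩,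
                (hsS x).mpr ⟨k0, by omega, hmk⟩⟩
          refine ih fS _ seenS _ (m + 1) r ?_ ?_ ?_ ?_ nohit' h
          · intro x
            rw [e2]
            exact hfS x
          · intro x
            rw [e1]
            exact hstep.1 x
          · intro x
            rw [e2]
            exact hsS x
          · intro x
            rw [e1]
            exact hstep.2 x

theorem minLv_zero (a x : List (List Char)) : minLv a x 0 ↔ x = a := by
  constructor
  · intro h
    have := h.1
    rw [nthKids] at this
    exact List.mem_singleton.mp this
  · rintro rfl
    exact ⟨by simp [nthKids], by omega⟩

-- the bidirectional loop always answers with enough fuel (both seen sets are bounded)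
theorem totBidi (ca cb : List Char) (hlen : cb.length = ca.length) (f : Nat) :
    ∀ (fS fT : List (List (List Char))) (seenS seenT : PySem.Set (List (List Char))) (m : Nat),
      seenS.Nodup → seenT.Nodup →
      (∀ s ∈ seenS, s.length = 4 ∧ s.flatten.Perm ca) →
      (∀ s ∈ seenT, s.length = 4 ∧ s.flatten.Perm cb) →
      (∀ s ∈ fS, s.length = 4 ∧ s.flatten.Perm ca) →
      (∀ s ∈ fT, s.length = 4 ∧ s.flatten.Perm cb) →
      (Nat.factorial ca.length * (ca.length + 1) ^ 3 - seenS.length)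
        + (Nat.factorial ca.length * (ca.length + 1) ^ 3 - seenT.length) + 3 ≤ f →
      bLoop f fS fT seenS seenT m ≠ none := by
  induction f with
  | zero =>
    intro fS fT seenS seenT m _ _ _ _ _ _ hfuel
    exact absurd hfuel (by omega)
  | succ f ih =>
    intro fS fT seenS seenT m hndS hndT hvS hvT hfS hfT hfuel
    simp only [bLoop]
    by_cases hempty : fS = [] ∨ fT = []
    · rw [if_pos hempty]
      simp
    · rw [if_neg hempty]
      have hNb : Nat.factorial cb.length * (cb.length + 1) ^ 3
          = Nat.factorial ca.length * (ca.length + 1) ^ 3 := by rw [hlen]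
      by_cases hpar : m % 2 = 0
      · rw [if_pos hpar, bExpand_eq]
        by_cases hhit : ∃ c ∈ fS.flatMap kidsB, c ∈ seenT
        · rw [if_pos hhit]
          simp
        · rw [if_neg hhit]
          show bLoop f ([] ++ dFilter seenS (fS.flatMap kidsB)) fT
              (seenUpd seenS (fS.flatMap kidsB)) seenT (m + 1) ≠ none
          rw [List.nil_append]
          have hvC : ∀ t ∈ fS.flatMap kidsB, t.length = 4 ∧ t.flatten.Perm ca := by
            intro t ht
            obtain ⟨u, hu, htu⟩ := List.mem_flatMap.mp ht
            have hu4 := hfS u hu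
            rw [kidsB_eq_kids u hu4.1] at htu
            have hcv := kids_valid u hu4.1 t htu
            exact ⟨hcv.1, hcv.2.trans hu4.2⟩
          have hndS' := seenUpd_nodup seenS (fS.flatMap kidsB) hndS
          have hvS' : ∀ t ∈ seenUpd seenS (fS.flatMap kidsB),
              t.length = 4 ∧ t.flatten.Perm ca := by
            intro t ht
            rcases (mem_seenUpd seenS _ t).mp ht with h1 | h2
            · exact hvS t h1
            · exact hvC t (dFilter_subset _ _ _ h2)
          have hvF' : ∀ t ∈ dFilter seenS (fS.flatMap kidsB),
              t.length = 4 ∧ t.flatten.Perm ca :=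
            fun t ht => hvC t (dFilter_subset _ _ _ ht)
          by_cases hnil : dFilter seenS (fS.flatMap kidsB) = []
          · rw [hnil]
            obtain ⟨f', rfl⟩ : ∃ f', f = f' + 1 := ⟨f - 1, by omega⟩
            simp [bLoop]
          · refine ih _ fT _ seenT (m + 1) hndS' hndT hvS' hvT hvF' hfT ?_
            have hlenS := seenUpd_length seenS (fS.flatMap kidsB)
            have hcard := card_le ca _ hndS' hvS'
            have hne0 : (dFilter seenS (fS.flatMap kidsB)).length ≠ 0 :=
              fun h0 => hnil (List.length_eq_zero_iff.mp h0)
            omega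
      · rw [if_neg hpar, bExpand_eq]
        by_cases hhit : ∃ c ∈ fT.flatMap kidsB, c ∈ seenS
        · rw [if_pos hhit]
          simp
        · rw [if_neg hhit]
          show bLoop f fS ([] ++ dFilter seenT (fT.flatMap kidsB))
              seenS (seenUpd seenT (fT.flatMap kidsB)) (m + 1) ≠ none
          rw [List.nil_append]
          have hvC : ∀ t ∈ fT.flatMap kidsB, t.length = 4 ∧ t.flatten.Perm cb := by
            intro t ht
            obtain ⟨u, hu, htu⟩ := List.mem_flatMap.mp ht
            have hu4 := hfT u hu
            rw [kidsB_eq_kids u hu4.1] at htu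
            have hcv := kids_valid u hu4.1 t htu
            exact ⟨hcv.1, hcv.2.trans hu4.2⟩
          have hndT' := seenUpd_nodup seenT (fT.flatMap kidsB) hndT
          have hvT' : ∀ t ∈ seenUpd seenT (fT.flatMap kidsB),
              t.length = 4 ∧ t.flatten.Perm cb := by
            intro t ht
            rcases (mem_seenUpd seenT _ t).mp ht with h1 | h2
            · exact hvT t h1
            · exact hvC t (dFilter_subset _ _ _ h2)
          have hvF' : ∀ t ∈ dFilter seenT (fT.flatMap kidsB),
              t.length = 4 ∧ t.flatten.Perm cb :=
            fun t ht => hvC t (dFilter_subset _ _ _ ht)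
          by_cases hnil : dFilter seenT (fT.flatMap kidsB) = []
          · rw [hnil]
            obtain ⟨f', rfl⟩ : ∃ f', f = f' + 1 := ⟨f - 1, by omega⟩
            simp [bLoop]
          · refine ih fS _ seenS _ (m + 1) hndS hndT' hvS hvT' hfS hvF' ?_
            have hlenT := seenUpd_length seenT (fT.flatMap kidsB)
            have hcard := card_le cb _ hndT' hvT'
            rw [hNb] at hcard
            have hne0 : (dFilter seenT (fT.flatMap kidsB)).length ≠ 0 :=
              fun h0 => hnil (List.length_eq_zero_iff.mp h0)
            omega

-- tokens produced by str.split() are never empty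
theorem split0_go_ne_nil : ∀ (s cur : List Char) (acc : List (List Char)),
    (∀ t ∈ acc, t ≠ []) → ∀ t ∈ PySem.Chars.split₀.go s cur acc, t ≠ [] := by
  intro s
  induction s with
  | nil =>
    intro cur acc hacc t ht
    rw [PySem.Chars.split₀.go] at ht
    split at ht
    · exact hacc t (List.mem_reverse.mp ht)
    · rename_i hcur
      rcases List.mem_cons.mp (List.mem_reverse.mp ht) with h | h
      · subst h; simp [List.isEmpty_iff] at hcur; simpa using hcur
      · exact hacc t h
  | cons c rest ih =>
    intro cur acc hacc t ht
    rw [PySem.Chars.split₀.go] at ht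
    split at ht
    · split at ht
      · exact ih [] acc hacc t ht
      · rename_i hcur
        refine ih [] _ ?_ t ht
        intro u hu
        rcases List.mem_cons.mp hu with rfl | hu
        · simp [List.isEmpty_iff] at hcur; simpa using hcur
        · exact hacc u hu
    · exact ih (c :: cur) acc hacc t ht

theorem split0_ne_nil (s : String) (t : String) (ht : t ∈ PySem.Str.split₀ s) : t ≠ "" := by
  intro h0
  subst h0
  have hmem : ("" : String).toList ∈ (PySem.Str.split₀ s).map String.toList :=
    List.mem_map_of_mem ht
  rw [PySem.Str.split₀_map_toList] at hmem
  exact split0_go_ne_nil s.toList [] [] (by simp) ("" : String).toList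
    (by simpa [PySem.Chars.split₀] using hmem) rfl

-- the '0'-token normalization is injective on nonempty tokens
theorem norm_inj : ∀ (l1 l2 : List String),
    (∀ t ∈ l1, t ≠ "") → (∀ t ∈ l2, t ≠ "") →
    l1.map (fun t => solveAltNorm t.toList) = l2.map (fun t => solveAltNorm t.toList) →
    l1 = l2 := by
  intro l1
  induction l1 with
  | nil =>
    intro l2 _ _ h
    rcases l2 with _ | ⟨b, l2⟩
    · rfl
    · simp at h
  | cons a l1 ih =>
    intro l2 h1 h2 h
    rcases l2 with _ | ⟨b, l2⟩
    · simp at h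
    · simp only [List.map_cons, List.cons.injEq] at h
      have hab : a = b := by
        have hh := h.1
        unfold solveAltNorm at hh
        by_cases ha : a.toList = ['0'] <;> by_cases hb : b.toList = ['0']
        · apply String.toList_inj.mp
          rw [ha, hb]
        · rw [if_pos ha, if_neg hb] at hh
          have hb0 : b = "" := String.toList_inj.mp (by rw [← hh]; rfl)
          exact absurd hb0 (h2 b List.mem_cons_self)
        · rw [if_neg ha, if_pos hb] at hh
          have ha0 : a = "" := String.toList_inj.mp (by rw [hh]; rfl)
          exact absurd ha0 (h1 a List.mem_cons_self)
        · rw [if_neg ha, if_neg hb] at hh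
          exact String.toList_inj.mp hh
      rw [hab, ih l2 (fun t ht => h1 t (List.mem_cons_of_mem _ ht))
        (fun t ht => h2 t (List.mem_cons_of_mem _ ht)) h.2]

-- ===== VERDICT (by name: the statement is the Claim_ definition above) =====
theorem solve_spec : Claim_equal_solve := by
  unfold Claim_equal_solve
  intro start end_ _ hpre
  unfold Spec_solve
  by_cases hEq : PySem.Str.split₀ start = PySem.Str.split₀ end_
  · simp only [solve, solve_alt]
    rw [if_pos hEq, if_pos hEq]
  · have hpre' := hpre
    unfold Pre_solve at hpre'
    rcases hpre' with h | ⟨h4s, h4e, hperm0⟩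
    · exact absurd h hEq
    simp only [solve, solve_alt]
    rw [if_neg hEq, if_neg hEq]
    have hms : ((PySem.Str.split₀ start).map String.toList).length = 4 := by
      rw [List.length_map]; exact h4s
    have hme : ((PySem.Str.split₀ end_).map String.toList).length = 4 := by
      rw [List.length_map]; exact h4e
    have hsrc : solveNormalize ((PySem.Str.split₀ start).map String.toList)
        = (PySem.Str.split₀ start).map (fun t => solveAltNorm t.toList) := by
      rw [normalize_eq_map _ hms, List.map_map]
      rfl
    have htgt : solveNormalize ((PySem.Str.split₀ end_).map String.toList)
        = (PySem.Str.split₀ end_).map (fun t => solveAltNorm t.toList) := by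
      rw [normalize_eq_map _ hme, List.map_map]
      rfl
    rw [hsrc, htgt]
    set src := (PySem.Str.split₀ start).map (fun t => solveAltNorm t.toList) with hsrcdef
    set tgt := (PySem.Str.split₀ end_).map (fun t => solveAltNorm t.toList) with htgtdef
    have hsrc4 : src.length = 4 := by
      rw [hsrcdef, List.length_map]
      exact h4s
    have htgt4 : tgt.length = 4 := by
      rw [htgtdef, List.length_map]
      exact h4e
    have hperm : src.flatten.Perm tgt.flatten := hperm0
    have hne_st : src ≠ tgt := by
      intro hh
      exact hEq (norm_inj _ _ (fun t ht => split0_ne_nil start t ht)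
        (fun t ht => split0_ne_nil end_ t ht) hh)
    set n := src.flatten.length with hn
    set N := Nat.factorial n * (n + 1) ^ 3 with hN
    have hvsrc : src.length = 4 ∧ src.flatten.Perm src.flatten := ⟨hsrc4, List.Perm.refl _⟩
    have hAne := totA tgt src.flatten (13 * N + 13) [(0, src)] PySem.Set.empty
      (by simp [PySem.Set.empty]) (by simp [PySem.Set.empty]) ?hqv ?hfu
    case hqv =>
      intro p hp
      rcases List.mem_cons.mp hp with rfl | h0
      · exact hvsrc
      · simp at h0
    case hfu =>
      simp only [List.length_cons, List.length_nil, PySem.Set.empty, ← hn]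
      rw [← hN]
      omega
    obtain ⟨x, hx⟩ := Option.ne_none_iff_exists'.mp hAne
    have hof : PySem.Set.ofList [src] = [src] := rfl
    have hLne := totLev tgt src.flatten (N + 2) [src] (PySem.Set.ofList [src]) 0
      (by rw [hof]; simp) ?hsv ?hfv ?hfu2
    case hsv =>
      intro t ht
      rw [hof] at ht
      obtain rfl := List.mem_singleton.mp ht
      exact hvsrc
    case hfv =>
      intro t ht
      obtain rfl := List.mem_singleton.mp ht
      exact hvsrc
    case hfu2 =>
      rw [hof]
      simp only [List.length_singleton, ← hn]
      rw [← hN]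
      omega
    obtain ⟨y, hy⟩ := Option.ne_none_iff_exists'.mp hLne
    have hsim := sim tgt (N + 2) [src] [src] PySem.Set.empty (PySem.Set.ofList [src]) 0 y
      (by simp [dFilter, PySem.Set.empty]) ?hbb ?h44 ?hyy
    case hbb =>
      intro t
      rw [hof]
      simp [PySem.Set.empty]
    case h44 =>
      intro t ht
      obtain rfl := List.mem_singleton.mp ht
      exact hsrc4
    case hyy => exact hy
    obtain ⟨fA, hfA⟩ := hsim
    have hfA' : solveLoop tgt fA [((0 : Int), src)] PySem.Set.empty = some y := hfA
    have hx' := loopA_mono tgt (13 * N + 13) (max (13 * N + 13) fA) (le_max_left _ _)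
      _ _ _ hx
    have hy' := loopA_mono tgt fA (max (13 * N + 13) fA) (le_max_right _ _) _ _ _ hfA'
    rw [hx'] at hy'
    have hxy : x = y := Option.some.inj hy'
    rw [hxy] at hx
    clear hxy hx' hy'
    -- B-side: the bidirectional loop returns, and is characterized by bChar
    have hlen_ba : tgt.flatten.length = src.flatten.length := hperm.length_eq.symm
    have hofT : PySem.Set.ofList [tgt] = [tgt] := rfl
    have hvtgt : tgt.length = 4 ∧ tgt.flatten.Perm tgt.flatten := ⟨htgt4, List.Perm.refl _⟩
    have hBne := totBidi src.flatten tgt.flatten hlen_ba (2 * N + 4) [src] [tgt]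
      (PySem.Set.ofList [src]) (PySem.Set.ofList [tgt]) 0
      (by rw [hof]; simp) (by rw [hofT]; simp) ?hvS ?hvT ?hfS ?hfT ?hfu3
    case hvS =>
      intro t ht
      rw [hof] at ht
      obtain rfl := List.mem_singleton.mp ht
      exact hvsrc
    case hvT =>
      intro t ht
      rw [hofT] at ht
      obtain rfl := List.mem_singleton.mp ht
      exact hvtgt
    case hfS =>
      intro t ht
      obtain rfl := List.mem_singleton.mp ht
      exact hvsrc
    case hfT =>
      intro t ht
      obtain rfl := List.mem_singleton.mp ht
      exact hvtgt
    case hfu3 =>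
      rw [hof, hofT]
      simp only [List.length_singleton, ← hn]
      rw [← hN]
      omega
    obtain ⟨z, hz⟩ := Option.ne_none_iff_exists'.mp hBne
    -- characterize the reference level BFS answer
    have hF0 : ∀ u, u ∈ [src] ↔ minLv src u 0 := by
      intro u
      rw [minLv_zero]
      simp
    have hseen0 : ∀ u, u ∈ PySem.Set.ofList [src] ↔ ∃ k ≤ 0, minLv src u k := by
      intro u
      rw [hof, List.mem_singleton]
      constructor
      · rintro rfl
        exact ⟨0, le_refl 0, (minLv_zero src src).mpr rfl⟩
      · rintro ⟨k, hk, hmk⟩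
        obtain rfl : k = 0 := by omega
        exact (minLv_zero src u).mp hmk
    have hnt0 : ∀ k ≤ 0, tgt ∉ nthKids src k := by
      intro k hk hmem
      obtain rfl : k = 0 := by omega
      rw [nthKids] at hmem
      exact hne_st (List.mem_singleton.mp hmem).symm
    have hy0 : levLoop tgt (N + 2) [src] (PySem.Set.ofList [src]) ((0 : Nat) : Int)
        = some y := by simpa using hy
    have hychar := levChar src tgt hsrc4 (N + 2) [src] (PySem.Set.ofList [src]) 0 y
      hF0 hseen0 hnt0 hy0
    -- characterize the bidirectional answer
    have hzchar := bChar src tgt hsrc4 htgt4 (2 * N + 4) [src] [tgt]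
      (PySem.Set.ofList [src]) (PySem.Set.ofList [tgt]) 0 z
      (by
        intro u
        show u ∈ [src] ↔ minLv src u 0
        rw [minLv_zero]
        simp)
      (by
        intro u
        show u ∈ [tgt] ↔ minLv tgt u 0
        rw [minLv_zero]
        simp)
      (by
        intro u
        show u ∈ PySem.Set.ofList [src] ↔ ∃ k ≤ 0, minLv src u k
        exact hseen0 u)
      (by
        intro u
        show u ∈ PySem.Set.ofList [tgt] ↔ ∃ l ≤ 0, minLv tgt u l
        rw [hofT, List.mem_singleton]
        constructor
        · rintro rfl
          exact ⟨0, le_refl 0, (minLv_zero tgt tgt).mpr rfl⟩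
        · rintro ⟨l, hl, hml⟩
          obtain rfl : l = 0 := by omega
          exact (minLv_zero tgt u).mp hml)
      (by
        intro u k l hk hl hm1 hm2
        have hk0 : k = 0 := by
          have : (0 + 1) / 2 = 0 := rfl
          omega
        have hl0 : l = 0 := by
          have : 0 / 2 = 0 := rfl
          omega
        subst hk0
        subst hl0
        rw [nthKids] at hm1 hm2
        exact hne_st ((List.mem_singleton.mp hm1).symm.trans (List.mem_singleton.mp hm2)))
      hz
    by_cases hreach : ∃ nn, tgt ∈ nthKids src nn
    · obtain ⟨nn, hnn⟩ := hreach
      rcases y with _ | v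
      · exact absurd hnn (hychar.2 rfl nn)
      rcases z with _ | w
      · exact absurd hnn (hzchar.2 rfl nn)
      obtain ⟨D1, hmD1, rfl⟩ := hychar.1 v rfl
      obtain ⟨D2, hmD2, rfl⟩ := hzchar.1 w rfl
      have hD12 : D1 = D2 := minLv_unique _ _ _ _ hmD1 hmD2
      rw [hx, hz, hD12]
    · have hyn : y = none := by
        rcases y with _ | v
        · rfl
        · obtain ⟨D1, hmD1, _⟩ := hychar.1 v rfl
          exact absurd ⟨D1, hmD1.1⟩ hreach
      have hzn : z = none := by
        rcases z with _ | w
        · rfl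
        · obtain ⟨D2, hmD2, _⟩ := hzchar.1 w rfl
          exact absurd ⟨D2, hmD2.1⟩ hreach
      rw [hx, hz, hyn, hzn]
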